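-- pv_equiv track=rewrite | github.com/bugoverdose/examples | algorithms/programmers/dfsbfs/puzzlepieces/solution.py | solution
-- ===== SOURCE A (Python) =====
-- dy = [1, -1, 0, 0]
--
-- dx = [0, 0, 1, -1]
--
-- def create_squares(table, check_filled):
--     N = len(table)
--     M = len(table[0])
--     pieces = []
--     visited = [[False for _ in range(M)] for _ in range(N)]
--     for i in range(N):
--         for j in range(M):
--             if visited[i][j]: continue
--             visited[i][j] = True
--             if check_filled ^ table[i][j]: continue
--             base_pieces = [] # ex. 5번 조각 = [(0,0), (1,0)]
--             stack = [(i, j)]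
--             while stack:
--                 cur_i, cur_j = stack.pop()
--                 base_pieces.append((cur_i - i, cur_j - j))
--                 for d in range(4):
--                     next_i = cur_i + dy[d]
--                     next_j = cur_j + dx[d]
--                     if next_i < 0 or next_i >= N: continue
--                     if next_j < 0 or next_j >= M: continue
--                     if visited[next_i][next_j]: continue
--                     visited[next_i][next_j] = True
--                     if check_filled ^ table[next_i][next_j]: continue
--                     stack.append((next_i, next_j))
--             pieces.append(base_pieces)
--     piece_squares = []
--     for p in pieces:
--         piece_squares.append((len(p), to_squares(p)))
--     return piece_squares
--
-- def to_squares(pieces):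
--     min_y, max_y = 99, 0
--     min_x, max_x = 99, 0
--     for p in pieces:
--         min_y = min(min_y, p[0])
--         max_y = max(max_y, p[0])
--         min_x = min(min_x, p[1])
--         max_x = max(max_x, p[1])
--     max_y -= min_y
--     max_x -= min_x
--     square = [[0 for _ in range(max_x+1)] for _ in range(max_y+1)]
--     for p in pieces:
--         square[p[0] - min_y][p[1] - min_x] = 1
--     return square
--
-- def is_fit(piece_square, space_square):
--     if piece_square[0] != space_square[0]:
--         return False
--     pieces = piece_square[1]
--     target = space_square[1]
--     N = len(pieces)
--     M = len(pieces[0])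
--     for i in range(4):
--         if i > 0:
--             target = rotate(target)
--         if N != len(target): continue
--         if M != len(target[0]): continue
--         all_same = True
--         for y in range(N):
--             for x in range(M):
--                 if pieces[y][x] != target[y][x]:
--                     all_same = False
--                     break
--             if not all_same: break
--         if all_same: return True
--     return False
--
-- def rotate(square):
--     N = len(square)
--     M = len(square[0])
--     rotated = [[0 for _ in range(N)] for _ in range(M)] # M * N
--     for y in range(N):
--         for x in range(M):
--             rotated[x][N-y-1] = square[y][x]
--             # (4,2) => (2, N-4 -1)
--     return rotated
--
-- def solution(board, table):
--     answer = 0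
--     pieces = create_squares(table, True)
--     targets = create_squares(board, False)
--     for p in pieces:
--         for idx in range(len(targets)):
--             e = targets[idx]
--             if is_fit(p, e):
--                 answer += e[0] # 공간 크기만큼 가산
--                 # 채줘졌으니 목록에서 제거
--                 if idx+1 >= len(targets):
--                     targets = targets[:idx]
--                 else:
--                     targets = targets[:idx] + targets[idx+1:]
--                 break
--     return answer
-- ===== SOURCE B (Python) =====
-- from collections import Counter
--
--
-- def _components(grid, want):
--     """Connected components of cells whose value equals `want`, each as the
--     list of coordinates relative to the component's first-seen cell.
--     Visited bookkeeping is a coordinate set, not a boolean matrix."""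
--     n, m = len(grid), len(grid[0])
--     seen = set()
--     comps = []
--     for i in range(n):
--         for j in range(m):
--             if (i, j) in seen:
--                 continue
--             seen.add((i, j))
--             if grid[i][j] != want:
--                 continue
--             cells = []
--             stack = [(i, j)]
--             while stack:
--                 y, x = stack.pop()
--                 cells.append((y - i, x - j))
--                 for c in ((y + 1, x), (y - 1, x), (y, x + 1), (y, x - 1)):
--                     if 0 <= c[0] < n and 0 <= c[1] < m and c not in seen:
--                         seen.add(c)
--                         if grid[c[0]][c[1]] == want:
--                             stack.append(c)
--             comps.append(cells)
--     return comps
--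
--
-- def _grid(cells):
--     ys = [y for y, _ in cells]
--     xs = [x for _, x in cells]
--     y0, x0 = min(ys), min(xs)
--     h, w = max(ys) - y0 + 1, max(xs) - x0 + 1
--     cs = set(cells)
--     return [[1 if (y0 + y, x0 + x) in cs else 0 for x in range(w)] for y in range(h)]
--
--
-- def _rot90(g):
--     n, m = len(g), len(g[0])
--     return [[g[n - 1 - b][a] for b in range(n)] for a in range(m)]
--
--
-- def _canon(g):
--     best = g
--     for _ in range(3):
--         g = _rot90(g)
--         if g < best:
--             best = g
--     return tuple(map(tuple, best))
--
--
-- def solution(board, table):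
--     def keys(grid, want):
--         return Counter((len(c), _canon(_grid(c))) for c in _components(grid, want))
--
--     pc = keys(table, 1)
--     tc = keys(board, 0)
--     return sum(min(cnt, tc[k]) * k[0] for k, cnt in pc.items())
-- ===== Notes on version B (the rewrite author's own statement) =====
-- stated objective: alternative
-- what changed: A matches each piece to the first fitting empty space by re-rotating and element-wise comparing every target grid for every piece (greedy first-fit); B canonicalizes every shape once (lexicographic minimum of its four rotations), bucket-counts pieces and spaces with a Counter keyed by (size, canonical grid), and returns sum of min(piece count, space count) * size per bucket; B's component scan also keeps visited cells in a coordinate set instead of A's boolean matrix.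
import Mathlib
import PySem

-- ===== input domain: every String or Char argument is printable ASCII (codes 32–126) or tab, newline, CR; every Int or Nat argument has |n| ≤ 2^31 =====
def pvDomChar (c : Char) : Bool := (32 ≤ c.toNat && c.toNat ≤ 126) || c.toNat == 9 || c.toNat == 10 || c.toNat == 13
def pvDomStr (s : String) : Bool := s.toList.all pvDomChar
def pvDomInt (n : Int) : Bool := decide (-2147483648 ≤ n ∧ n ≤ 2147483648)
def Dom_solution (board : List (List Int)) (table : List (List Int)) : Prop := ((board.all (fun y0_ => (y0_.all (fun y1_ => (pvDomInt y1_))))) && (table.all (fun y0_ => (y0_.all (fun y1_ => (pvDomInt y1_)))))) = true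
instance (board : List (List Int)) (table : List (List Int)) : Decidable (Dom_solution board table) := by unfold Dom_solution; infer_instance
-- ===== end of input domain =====

-- B re-implements the matching phase: instead of A's greedy first-fit scan that re-rotates every
-- empty space for every piece, B canonicalizes each shape (lexicographic minimum of its four
-- rotations) and bucket-counts pieces against spaces, summing min(count)*size per bucket; B's
-- component scan keeps visited cells in a coordinate set instead of A's boolean matrix.

-- ===== PORT A =====

def dyL : List Int := [1, -1, 0, 0]
def dxL : List Int := [0, 0, 1, -1]

-- visited[i][j] read / write (indices are guarded to be in range before every call)
def vget (v : List (List Bool)) (i j : Int) : Option Bool :=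
  (PySem.List.pyGet? v i).bind (fun r => PySem.List.pyGet? r j)
def vset (v : List (List Bool)) (i j : Int) : List (List Bool) :=
  PySem.List.pySetD v i (PySem.List.pySetD (PySem.List.pyGetD v i []) j true)
-- table[i][j] (in range on every reachable call under Pre_solution)
def cellVal (g : List (List Int)) (i j : Int) : Int :=
  PySem.List.pyGetD (PySem.List.pyGetD g i []) j 0

def countFalse (v : List (List Bool)) : Nat := (v.map (fun r => r.count false)).sum

-- body of `for d in range(4): …` for the popped cell (ci, cj); state = (visited, stack)
def stepDir (g : List (List Int)) (keep : Int → Bool) (N M ci cj : Int)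
    (st : List (List Bool) × List (Int × Int)) (d : Int) :
    List (List Bool) × List (Int × Int) :=
  if ci + PySem.List.pyGetD dyL d 0 < 0 ∨ N ≤ ci + PySem.List.pyGetD dyL d 0 then st
  else if cj + PySem.List.pyGetD dxL d 0 < 0 ∨ M ≤ cj + PySem.List.pyGetD dxL d 0 then st
  else if (vget st.1 (ci + PySem.List.pyGetD dyL d 0) (cj + PySem.List.pyGetD dxL d 0)).getD true then st
  else if keep (cellVal g (ci + PySem.List.pyGetD dyL d 0) (cj + PySem.List.pyGetD dxL d 0)) then
    (vset st.1 (ci + PySem.List.pyGetD dyL d 0) (cj + PySem.List.pyGetD dxL d 0),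
      (ci + PySem.List.pyGetD dyL d 0, cj + PySem.List.pyGetD dxL d 0) :: st.2)
  else (vset st.1 (ci + PySem.List.pyGetD dyL d 0) (cj + PySem.List.pyGetD dxL d 0), st.2)

lemma count_false_set_true (row : List Bool) (m : Nat) (h : row[m]? = some false) :
    (row.set m true).count false + 1 = row.count false := by
  induction row generalizing m with
  | nil => simp at h
  | cons a t ih =>
    cases m with
    | zero => simp_all [List.count_cons]
    | succ m =>
      simp only [List.getElem?_cons_succ] at h
      simp only [List.set_cons_succ, List.count_cons]
      have := ih m h
      omega

lemma countFalse_set (v : List (List Bool)) (n : Nat) (row row' : List Bool)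
    (h : v[n]? = some row) :
    countFalse (v.set n row') + row.count false = countFalse v + row'.count false := by
  induction v generalizing n with
  | nil => simp at h
  | cons a t ih =>
    cases n with
    | zero => simp_all [countFalse]; omega
    | succ n =>
      simp only [List.getElem?_cons_succ] at h
      simp only [List.set_cons_succ, countFalse, List.map_cons, List.sum_cons]
      have := ih n h
      simp only [countFalse] at this
      omega

lemma countFalse_vset (v : List (List Bool)) (i j : Int) (hi : 0 ≤ i) (hj : 0 ≤ j)
    (h : vget v i j = some false) : countFalse (vset v i j) + 1 = countFalse v := by
  unfold vget at h
  obtain ⟨row, hrow, hcell⟩ : ∃ row, PySem.List.pyGet? v i = some row ∧ PySem.List.pyGet? row j = some false := by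
    cases hr : PySem.List.pyGet? v i with
    | none => simp [hr] at h
    | some r => exact ⟨r, rfl, by simpa [hr] using h⟩
  rw [PySem.List.pyGet?_of_nonneg _ hi] at hrow
  rw [PySem.List.pyGet?_of_nonneg _ hj] at hcell
  unfold vset
  rw [PySem.List.pySetD_of_nonneg _ _ hi]
  have hgd : PySem.List.pyGetD v i [] = row := by
    rw [PySem.List.pyGetD_of_nonneg _ _ hi]
    rw [List.getD_eq_getElem?_getD, hrow]; rfl
  rw [hgd, PySem.List.pySetD_of_nonneg _ _ hj]
  have h1 := countFalse_set v i.toNat row (row.set j.toNat true) hrow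
  have h2 := count_false_set_true row j.toNat hcell
  omega

lemma vget_eq_some_false {v : List (List Bool)} {i j : Int}
    (h : (vget v i j).getD true = false) : vget v i j = some false := by
  cases hv : vget v i j with
  | none => rw [hv] at h; simp at h
  | some b => rw [hv] at h; simp at h; simp [h]

lemma stepDir_measure (g : List (List Int)) (keep : Int → Bool) (N M ci cj : Int)
    (st : List (List Bool) × List (Int × Int)) (d : Int) :
    2 * countFalse (stepDir g keep N M ci cj st d).1 + (stepDir g keep N M ci cj st d).2.length
      ≤ 2 * countFalse st.1 + st.2.length := by
  unfold stepDir
  split_ifs with h1 h2 h3 h4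
  · exact le_refl _
  · exact le_refl _
  · exact le_refl _
  all_goals {
    rw [not_or, not_lt, not_le] at h1 h2
    rw [Bool.not_eq_true] at h3
    have hcf := countFalse_vset st.1 _ _ (by omega) (by omega) (vget_eq_some_false h3)
    simp only [List.length_cons]
    omega }

lemma foldl_stepDir_measure (g : List (List Int)) (keep : Int → Bool) (N M ci cj : Int)
    (ds : List Int) (st : List (List Bool) × List (Int × Int)) :
    2 * countFalse (ds.foldl (stepDir g keep N M ci cj) st).1
      + (ds.foldl (stepDir g keep N M ci cj) st).2.length
      ≤ 2 * countFalse st.1 + st.2.length := by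
  induction ds generalizing st with
  | nil => simp
  | cons d ds ih => exact le_trans (ih _) (stepDir_measure g keep N M ci cj st d)

-- `while stack:` loop of the flood fill
def dfsLoop (g : List (List Int)) (keep : Int → Bool) (N M oi oj : Int)
    (v : List (List Bool)) (stack : List (Int × Int)) (acc : List (Int × Int)) :
    List (List Bool) × List (Int × Int) :=
  match stack with
  | [] => (v, acc)
  | c :: rest =>
    let acc' := acc ++ [(c.1 - oi, c.2 - oj)]
    let st := (PySem.List.pyRange 0 4 1).foldl (stepDir g keep N M c.1 c.2) (v, rest)
    dfsLoop g keep N M oi oj st.1 st.2 acc'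
termination_by 2 * countFalse v + stack.length
decreasing_by
  have h := foldl_stepDir_measure g keep N M c.1 c.2 (PySem.List.pyRange 0 4 1) (v, rest)
  simp only [List.length_cons]
  simp only [Prod.fst, Prod.snd] at h
  omega

-- body of the outer double scan (one (i, j) cell); state = (visited, components found so far)
def scanCell (g : List (List Int)) (keep : Int → Bool) (N M : Int)
    (st : List (List Bool) × List (List (Int × Int))) (ij : Int × Int) :
    List (List Bool) × List (List (Int × Int)) :=
  if (vget st.1 ij.1 ij.2).getD true then st
  else
    let v' := vset st.1 ij.1 ij.2
    if keep (cellVal g ij.1 ij.2) then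
      let r := dfsLoop g keep N M ij.1 ij.2 v' [(ij.1, ij.2)] []
      (r.1, st.2 ++ [r.2])
    else (v', st.2)

def scanComp (g : List (List Int)) (keep : Int → Bool) : List (List (Int × Int)) :=
  let N : Int := g.length
  let M : Int := (PySem.List.pyGetD g 0 []).length
  let v0 : List (List Bool) := List.replicate N.toNat (List.replicate M.toNat false)
  (((PySem.List.pyRange 0 N 1).flatMap
      (fun i => (PySem.List.pyRange 0 M 1).map (fun j => (i, j)))).foldl
    (scanCell g keep N M) (v0, [])).2

-- to_squares: bounding box (one pass over the cells, four accumulators), zero grid, set cells to 1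
def toSquares (p : List (Int × Int)) : List (List Int) :=
  let s := p.foldl
    (fun (s : Int × Int × Int × Int) c =>
      (min s.1 c.1, max s.2.1 c.1, min s.2.2.1 c.2, max s.2.2.2 c.2)) (99, 0, 99, 0)
  let minY := s.1
  let maxY := s.2.1 - s.1
  let minX := s.2.2.1
  let maxX := s.2.2.2 - s.2.2.1
  let sq0 : List (List Int) := List.replicate (maxY + 1).toNat (List.replicate (maxX + 1).toNat 0)
  p.foldl (fun sq c =>
    PySem.List.pySetD sq (c.1 - minY)
      (PySem.List.pySetD (PySem.List.pyGetD sq (c.1 - minY) []) (c.2 - minX) 1)) sq0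

def rotateA (sq : List (List Int)) : List (List Int) :=
  let N : Int := sq.length
  let M : Int := (PySem.List.pyGetD sq 0 []).length
  let r0 : List (List Int) := List.replicate M.toNat (List.replicate N.toNat 0)
  (PySem.List.pyRange 0 N 1).foldl (fun r y =>
    (PySem.List.pyRange 0 M 1).foldl (fun r x =>
      PySem.List.pySetD r x
        (PySem.List.pySetD (PySem.List.pyGetD r x []) (N - y - 1) (cellVal sq y x))) r) r0

def isFit (p e : Int × List (List Int)) : Bool :=
  if p.1 ≠ e.1 then false
  else
    let pieces := p.2
    let N : Int := pieces.length
    let M : Int := (PySem.List.pyGetD pieces 0 []).length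
    ((PySem.List.pyRange 0 4 1).foldl (fun (st : List (List Int) × Bool) i =>
      if st.2 then st
      else
        let tgt := if 0 < i then rotateA st.1 else st.1
        if N ≠ (tgt.length : Int) then (tgt, false)
        else if M ≠ ((PySem.List.pyGetD tgt 0 []).length : Int) then (tgt, false)
        else (tgt, (PySem.List.pyRange 0 N 1).all (fun y =>
          (PySem.List.pyRange 0 M 1).all (fun x => cellVal pieces y x == cellVal tgt y x))))
      (e.2, false)).2

-- Python's `check_filled ^ cell` (bool ^ int, truthiness test) is truthy exactly when
-- cell ≠ int(check_filled); the skip test is ported as that comparison (exact for all ints).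
def createSquares (tbl : List (List Int)) (checkFilled : Bool) : List (Int × List (List Int)) :=
  (scanComp tbl (fun v => v == (if checkFilled then 1 else 0))).map
    (fun p => ((p.length : Int), toSquares p))

def solution (board : List (List Int)) (table : List (List Int)) : Int :=
  let pieces := createSquares table true
  let targets := createSquares board false
  (pieces.foldl (fun (st : Int × List (Int × List (List Int))) p =>
    -- `for idx in range(len(targets)): … break` : first-match scan
    match (st.2).findIdx? (isFit p) with
    | none => st
    | some idx =>
      let e := (st.2).getD idx (0, [])
      let ts := if (idx : Int) + 1 ≥ (st.2.length : Int)
        then PySem.List.slice st.2 none (some (idx : Int))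
        else PySem.List.slice st.2 none (some (idx : Int))
          ++ PySem.List.slice st.2 (some ((idx : Int) + 1)) none
      (st.1 + e.1, ts)) (0, targets)).1

-- ===== PORT B =====
-- B's scan: visited cells in a PySem.Set of coordinates, inline neighbor tuples, nested
-- row/column folds (Source B's `for i: for j:`); matching by canonical keys and a Counter.

-- grid[y][x]; every call is guarded in range, so the total Option-chain form is exact there
def cellValB (g : List (List Int)) (i j : Int) : Int :=
  ((PySem.List.pyGet? g i).bind (fun r => PySem.List.pyGet? r j)).getD 0

-- `for c in ((y+1,x),(y-1,x),(y,x+1),(y,x-1)):` body; state = (seen, stack)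
def bStep (g : List (List Int)) (want n m : Int)
    (st : PySem.Set (Int × Int) × List (Int × Int)) (c : Int × Int) :
    PySem.Set (Int × Int) × List (Int × Int) :=
  if 0 ≤ c.1 ∧ c.1 < n ∧ 0 ≤ c.2 ∧ c.2 < m ∧ c ∉ st.1 then
    (PySem.Set.add st.1 c,
      if cellValB g c.1 c.2 == want then c :: st.2 else st.2)
  else st

-- termination measure for B's `while stack:` loop: in-range cells not yet seen
def bAll (n m : Int) : List (Int × Int) :=
  (PySem.List.pyRange 0 n 1).flatMap
    (fun i => (PySem.List.pyRange 0 m 1).map (fun j => (i, j)))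

def bUnseen (n m : Int) (s : PySem.Set (Int × Int)) : Nat :=
  ((bAll n m).filter (fun c => decide (c ∉ s))).length

lemma bCountP_lt {α : Type} (p q : α → Bool) (hpq : ∀ x, p x = true → q x = true) :
    ∀ (l : List α) (c : α), c ∈ l → q c = true → p c = false →
      l.countP p < l.countP q := by
  intro l
  induction l with
  | nil => intro c hc; simp at hc
  | cons a t ih =>
    intro c hc hqc hpc
    rw [List.countP_cons, List.countP_cons]
    rcases List.mem_cons.mp hc with rfl | hct
    · have hle : t.countP p ≤ t.countP q := List.countP_mono_left (fun x _ => hpq x)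
      simp only [hqc, hpc]
      simp
      omega
    · have h1 : t.countP p < t.countP q := ih c hct hqc hpc
      have h2 : (if p a = true then 1 else 0) ≤ (if q a = true then 1 else 0) := by
        by_cases hpa : p a = true
        · rw [if_pos hpa, if_pos (hpq a hpa)]
        · rw [if_neg hpa]; split_ifs <;> omega
      omega

lemma bUnseen_add_lt (n m : Int) (s : PySem.Set (Int × Int)) (c : Int × Int)
    (hc : 0 ≤ c.1 ∧ c.1 < n ∧ 0 ≤ c.2 ∧ c.2 < m) (hns : c ∉ s) :
    bUnseen n m (PySem.Set.add s c) < bUnseen n m s := by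
  unfold bUnseen
  rw [← List.countP_eq_length_filter, ← List.countP_eq_length_filter]
  apply bCountP_lt
  · intro x hx
    simp only [decide_eq_true_eq] at hx ⊢
    intro hmem
    exact hx ((PySem.Set.mem_add _ _ _).mpr (Or.inl hmem))
  · unfold bAll
    rw [List.mem_flatMap]
    refine ⟨c.1, PySem.List.mem_pyRange_one.mpr ⟨hc.1, hc.2.1⟩, ?_⟩
    rw [List.mem_map]
    exact ⟨c.2, PySem.List.mem_pyRange_one.mpr ⟨hc.2.2.1, hc.2.2.2⟩, rfl⟩
  · simpa using hns
  · simp [PySem.Set.mem_add]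

lemma bStep_measure (g : List (List Int)) (want n m : Int)
    (st : PySem.Set (Int × Int) × List (Int × Int)) (c : Int × Int) :
    2 * bUnseen n m (bStep g want n m st c).1 + (bStep g want n m st c).2.length
      ≤ 2 * bUnseen n m st.1 + st.2.length := by
  unfold bStep
  by_cases h : 0 ≤ c.1 ∧ c.1 < n ∧ 0 ≤ c.2 ∧ c.2 < m ∧ c ∉ st.1
  · rw [if_pos h]
    obtain ⟨h1, h2, h3, h4, h5⟩ := h
    have hlt := bUnseen_add_lt n m st.1 c ⟨h1, h2, h3, h4⟩ h5
    by_cases hm : (cellValB g c.1 c.2 == want) = true <;> simp [hm] <;> omega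
  · rw [if_neg h]

lemma foldl_bStep_measure (g : List (List Int)) (want n m : Int)
    (cs : List (Int × Int)) (st : PySem.Set (Int × Int) × List (Int × Int)) :
    2 * bUnseen n m (cs.foldl (bStep g want n m) st).1
      + (cs.foldl (bStep g want n m) st).2.length
      ≤ 2 * bUnseen n m st.1 + st.2.length := by
  induction cs generalizing st with
  | nil => simp
  | cons c cs ih => exact le_trans (ih _) (bStep_measure g want n m st c)

-- `while stack:` loop of Source B's fill
def bFill (g : List (List Int)) (want n m oy ox : Int)
    (seen : PySem.Set (Int × Int)) (stack cells : List (Int × Int)) :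
    PySem.Set (Int × Int) × List (Int × Int) :=
  match stack with
  | [] => (seen, cells)
  | c :: rest =>
    let st := ([(c.1 + 1, c.2), (c.1 - 1, c.2), (c.1, c.2 + 1), (c.1, c.2 - 1)]).foldl
      (bStep g want n m) (seen, rest)
    bFill g want n m oy ox st.1 st.2 (cells ++ [(c.1 - oy, c.2 - ox)])
termination_by 2 * bUnseen n m seen + stack.length
decreasing_by
  have h := foldl_bStep_measure g want n m
    [(c.1 + 1, c.2), (c.1 - 1, c.2), (c.1, c.2 + 1), (c.1, c.2 - 1)] (seen, rest)
  simp only [List.length_cons]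
  simp only [Prod.fst, Prod.snd] at h
  omega

-- body of `for j in range(m):`; state = (seen, components)
def bScanCell (g : List (List Int)) (want n m : Int)
    (st : PySem.Set (Int × Int) × List (List (Int × Int))) (i j : Int) :
    PySem.Set (Int × Int) × List (List (Int × Int)) :=
  if (i, j) ∈ st.1 then st
  else
    let s' := PySem.Set.add st.1 (i, j)
    if cellValB g i j == want then
      let r := bFill g want n m i j s' [(i, j)] []
      (r.1, st.2 ++ [r.2])
    else (s', st.2)

def bComponents (g : List (List Int)) (want : Int) : List (List (Int × Int)) :=
  let n : Int := g.length
  let m : Int := (PySem.List.pyGetD g 0 []).length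
  ((PySem.List.pyRange 0 n 1).foldl (fun st i =>
      (PySem.List.pyRange 0 m 1).foldl (fun st j => bScanCell g want n m st i j) st)
    (PySem.Set.empty, [])).2

-- _grid: bounding box via min()/max(), grid by membership in the cell set
-- (the components passed in are always nonempty, so python's min/max never raise)
def gridB (cells : List (Int × Int)) : List (List Int) :=
  let ys := cells.map (fun c => c.1)
  let xs := cells.map (fun c => c.2)
  let y0 := (PySem.List.min? ys (fun y => y)).getD 0
  let x0 := (PySem.List.min? xs (fun x => x)).getD 0
  let h := (PySem.List.max? ys (fun y => y)).getD 0 - y0 + 1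
  let w := (PySem.List.max? xs (fun x => x)).getD 0 - x0 + 1
  let cs := PySem.Set.ofList cells
  (PySem.List.pyRange 0 h 1).map (fun y =>
    (PySem.List.pyRange 0 w 1).map (fun x => if (y0 + y, x0 + x) ∈ cs then (1 : Int) else 0))

-- _rot90: [[g[n-1-b][a] for b in range(n)] for a in range(m)]
def rotB (g : List (List Int)) : List (List Int) :=
  let n : Int := g.length
  let m : Int := (PySem.List.pyGetD g 0 []).length
  (PySem.List.pyRange 0 m 1).map (fun a =>
    (PySem.List.pyRange 0 n 1).map (fun b => cellValB g (n - 1 - b) a))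

-- Python's `<` on list-of-int / list-of-list-of-int (first unequal element decides)
def ltIntList : List Int → List Int → Bool
  | _, [] => false
  | [], _ :: _ => true
  | a :: as, b :: bs => if a = b then ltIntList as bs else decide (a < b)

def ltGrid : List (List Int) → List (List Int) → Bool
  | _, [] => false
  | [], _ :: _ => true
  | r :: rs, s :: ss => if r = s then ltGrid rs ss else ltIntList r s

-- _canon: best = g; three times: g = rot90(g); if g < best: best = g
def canonB (g : List (List Int)) : List (List Int) :=
  ((PySem.List.pyRange 0 3 1).foldl
    (fun (st : List (List Int) × List (List Int)) _ =>
      let g' := rotB st.1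
      (g', if ltGrid g' st.2 then g' else st.2)) (g, g)).2

def keyList (g : List (List Int)) (want : Int) : List (Int × List (List Int)) :=
  (bComponents g want).map (fun c => ((c.length : Int), canonB (gridB c)))

def solution_alt (board : List (List Int)) (table : List (List Int)) : Int :=
  let pc := PySem.Dict.counter (keyList table 1)
  let tc := PySem.Dict.counter (keyList board 0)
  ((pc.items).map (fun kv => min kv.2 (tc.getD kv.1 0) * kv.1.1)).sum

-- ===== PRECONDITION & SPEC =====
-- A raises IndexError on an empty board/table (len(table[0])) and whenever some row is shorter
-- than the first row (the scan reads column indices up to len(first row) - 1 in every row);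
-- exactly those inputs are excluded.
def Pre_solution (board : List (List Int)) (table : List (List Int)) : Prop :=
  board ≠ [] ∧ table ≠ [] ∧
  (∀ r ∈ board, (board.headI).length ≤ r.length) ∧
  (∀ r ∈ table, (table.headI).length ≤ r.length)
instance (board : List (List Int)) (table : List (List Int)) : Decidable (Pre_solution board table) := by
  unfold Pre_solution; infer_instance

def pvWitness_solution : List (List Int) × List (List Int) := ([[0, 0], [1, 0]], [[1, 1], [0, 1]])

def Spec_solution (board : List (List Int)) (table : List (List Int)) (out : Int) : Prop :=
  out = solution_alt board table
instance (board : List (List Int)) (table : List (List Int)) (out : Int) :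
    Decidable (Spec_solution board table out) := by unfold Spec_solution; infer_instance

-- ===== CLAIM (what is proved, stated in full; the proofs are below) =====
def Claim_equal_solution : Prop := ∀ (board : List (List Int)) (table : List (List Int)),
  Dom_solution board table → Pre_solution board table → Spec_solution board table (solution board table)

-- ===== LEMMAS AND PROOFS =====

-- ---------- Part 0: the two component scans are bisimilar ----------
-- Invariant: the set `s` holds exactly the coordinates marked true in the matrix `v`.

def ShapeB (N M : Int) (v : List (List Bool)) : Prop :=
  v.length = N.toNat ∧ ∀ r ∈ v, r.length = M.toNat

def RelVS (N M : Int) (v : List (List Bool)) (s : PySem.Set (Int × Int)) : Prop :=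
  ShapeB N M v ∧ ∀ i j : Int, 0 ≤ i → i < N → 0 ≤ j → j < M →
    (vget v i j).getD true = decide ((i, j) ∈ s)

lemma getD_set_eq {α : Type} (l : List α) (n m : Nat) (a : α) (d : α) (hn : n < l.length) :
    (l.set n a).getD m d = if n = m then a else l.getD m d := by
  rw [List.getD_eq_getElem?_getD, List.getElem?_set]
  by_cases h : n = m
  · rw [if_pos h, if_pos h, if_pos hn]; rfl
  · rw [if_neg h, if_neg h, ← List.getD_eq_getElem?_getD]

lemma vget_getD_eq {N M : Int} {v : List (List Bool)} (hs : ShapeB N M v)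
    {i j : Int} (hi : 0 ≤ i ∧ i < N) (hj : 0 ≤ j ∧ j < M) :
    vget v i j = some ((v.getD i.toNat []).getD j.toNat true) := by
  obtain ⟨hl, hr⟩ := hs
  unfold vget
  rw [PySem.List.pyGet?_of_nonneg _ hi.1]
  have hiN : i.toNat < v.length := by omega
  rw [List.getElem?_eq_getElem hiN]
  have hrow : v[i.toNat].length = M.toNat := hr _ (List.getElem_mem _)
  have hjM : j.toNat < v[i.toNat].length := by omega
  simp only [Option.bind_some]
  rw [PySem.List.pyGet?_of_nonneg _ hj.1, List.getElem?_eq_getElem hjM]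
  congr 1
  rw [List.getD_eq_getElem _ _ hiN, List.getD_eq_getElem _ _ hjM]

lemma shapeB_vset {N M : Int} {v : List (List Bool)} (hs : ShapeB N M v)
    {i j : Int} (hi : 0 ≤ i ∧ i < N) (hj : 0 ≤ j) : ShapeB N M (vset v i j) := by
  obtain ⟨hl, hr⟩ := hs
  unfold vset
  rw [PySem.List.pySetD_of_nonneg _ _ hi.1, PySem.List.pySetD_of_nonneg _ _ hj]
  constructor
  · simp [hl]
  · intro r hr'
    rcases List.mem_or_eq_of_mem_set hr' with h | h
    · exact hr _ h
    · subst h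
      simp only [List.length_set]
      rw [PySem.List.pyGetD_of_nonneg _ _ hi.1, List.getD_eq_getElem _ _ (by omega)]
      exact hr _ (List.getElem_mem _)

lemma vget_vset_getD {N M : Int} {v : List (List Bool)} (hs : ShapeB N M v)
    {i j y x : Int} (hi : 0 ≤ i ∧ i < N) (hj : 0 ≤ j ∧ j < M)
    (hy : 0 ≤ y ∧ y < N) (hx : 0 ≤ x ∧ x < M) :
    (vget (vset v i j) y x).getD true
      = if y = i ∧ x = j then true else (vget v y x).getD true := by
  have hs' : ShapeB N M (vset v i j) := shapeB_vset hs hi hj.1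
  rw [vget_getD_eq hs' hy hx, vget_getD_eq hs hy hx]
  obtain ⟨hl, hr⟩ := hs
  have hrow : (v.getD i.toNat []).length = M.toNat := by
    rw [List.getD_eq_getElem _ _ (by omega)]; exact hr _ (List.getElem_mem _)
  unfold vset
  rw [PySem.List.pySetD_of_nonneg _ _ hi.1, PySem.List.pySetD_of_nonneg _ _ hj.1,
      PySem.List.pyGetD_of_nonneg _ _ hi.1]
  simp only [Option.getD_some]
  rw [getD_set_eq _ _ _ _ _ (by omega)]
  by_cases hyi : y = i
  · rw [if_pos (by omega : i.toNat = y.toNat)]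
    rw [getD_set_eq _ _ _ _ _ (by omega)]
    by_cases hxj : x = j
    · rw [if_pos (by omega : j.toNat = x.toNat), if_pos ⟨hyi, hxj⟩]
    · rw [if_neg (by omega : ¬ j.toNat = x.toNat), if_neg (by simp [hxj]), hyi]
  · rw [if_neg (by omega : ¬ i.toNat = y.toNat), if_neg (by simp [hyi])]

lemma rel_add {N M : Int} {v : List (List Bool)} {s : PySem.Set (Int × Int)}
    (hrel : RelVS N M v s) {i j : Int} (hi : 0 ≤ i ∧ i < N) (hj : 0 ≤ j ∧ j < M) :
    RelVS N M (vset v i j) (PySem.Set.add s (i, j)) := by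
  obtain ⟨hs, hval⟩ := hrel
  refine ⟨shapeB_vset hs hi hj.1, ?_⟩
  intro y x hy1 hy2 hx1 hx2
  rw [vget_vset_getD hs hi hj ⟨hy1, hy2⟩ ⟨hx1, hx2⟩]
  by_cases hc : y = i ∧ x = j
  · rw [if_pos hc]
    have hmem : (y, x) ∈ PySem.Set.add s (i, j) :=
      (PySem.Set.mem_add _ _ _).mpr (Or.inr (by rw [hc.1, hc.2]))
    simp [hmem]
  · rw [if_neg hc, hval y x hy1 hy2 hx1 hx2]
    have hne : (y, x) ≠ (i, j) := by
      intro h; exact hc ⟨congrArg Prod.fst h, congrArg Prod.snd h⟩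
    by_cases hm : (y, x) ∈ s
    · have : (y, x) ∈ PySem.Set.add s (i, j) := (PySem.Set.mem_add _ _ _).mpr (Or.inl hm)
      simp [hm, this]
    · have : (y, x) ∉ PySem.Set.add s (i, j) := by
        rw [PySem.Set.mem_add]; rintro (h | h); exact hm h; exact hne h
      simp [hm, this]

-- A's direction step, with the dy/dx lookup resolved to the target coordinate
def tStep (g : List (List Int)) (keep : Int → Bool) (N M ni nj : Int)
    (st : List (List Bool) × List (Int × Int)) : List (List Bool) × List (Int × Int) :=
  if ni < 0 ∨ N ≤ ni then st
  else if nj < 0 ∨ M ≤ nj then st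
  else if (vget st.1 ni nj).getD true then st
  else if keep (cellVal g ni nj) then (vset st.1 ni nj, (ni, nj) :: st.2)
  else (vset st.1 ni nj, st.2)

lemma stepDir_eq_tStep {g : List (List Int)} {keep : Int → Bool} {N M ci cj : Int}
    {st : List (List Bool) × List (Int × Int)} (d δy δx : Int)
    (hy : PySem.List.pyGetD dyL d 0 = δy) (hx : PySem.List.pyGetD dxL d 0 = δx) :
    stepDir g keep N M ci cj st d = tStep g keep N M (ci + δy) (cj + δx) st := by
  unfold stepDir tStep
  rw [hy, hx]

lemma cellValB_eq_cellVal (g : List (List Int)) (i j : Int) (hi : 0 ≤ i) (hj : 0 ≤ j) :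
    cellValB g i j = cellVal g i j := by
  unfold cellValB cellVal
  rw [PySem.List.pyGet?_of_nonneg _ hi, PySem.List.pyGetD_of_nonneg _ _ hi]
  cases hr : g[i.toNat]? with
  | none =>
    rw [List.getD_eq_getElem?_getD, hr]
    rw [PySem.List.pyGetD_of_nonneg _ _ hj]
    simp
  | some row =>
    rw [List.getD_eq_getElem?_getD, hr]
    simp only [Option.getD_some, Option.bind_some]
    rw [PySem.List.pyGet?_of_nonneg _ hj, PySem.List.pyGetD_of_nonneg _ _ hj,
      List.getD_eq_getElem?_getD]

lemma pair_sim (g : List (List Int)) (want N M : Int) {v : List (List Bool)}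
    {s : PySem.Set (Int × Int)} (hrel : RelVS N M v s)
    (stack : List (Int × Int)) (c : Int × Int) :
    RelVS N M (tStep g (fun x => x == want) N M c.1 c.2 (v, stack)).1
        (bStep g want N M (s, stack) c).1 ∧
    (tStep g (fun x => x == want) N M c.1 c.2 (v, stack)).2
      = (bStep g want N M (s, stack) c).2 := by
  simp only [tStep, bStep]
  by_cases h1 : c.1 < 0 ∨ N ≤ c.1
  · have hnc : ¬(0 ≤ c.1 ∧ c.1 < N ∧ 0 ≤ c.2 ∧ c.2 < M ∧ c ∉ s) := by
      rintro ⟨a, b, _⟩; omega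
    rw [if_pos h1, if_neg hnc]
    exact ⟨hrel, rfl⟩
  · rw [if_neg h1]
    by_cases h2 : c.2 < 0 ∨ M ≤ c.2
    · have hnc : ¬(0 ≤ c.1 ∧ c.1 < N ∧ 0 ≤ c.2 ∧ c.2 < M ∧ c ∉ s) := by
        rintro ⟨a, b, c_, d_, _⟩; omega
      rw [if_pos h2, if_neg hnc]
      exact ⟨hrel, rfl⟩
    · rw [if_neg h2]
      have hi : 0 ≤ c.1 ∧ c.1 < N := by omega
      have hj : 0 ≤ c.2 ∧ c.2 < M := by omega
      have hvg := hrel.2 c.1 c.2 hi.1 hi.2 hj.1 hj.2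
      by_cases h3 : c ∈ s
      · have h3' : (c.1, c.2) ∈ s := h3
        have hA3 : (vget v c.1 c.2).getD true = true := by
          rw [hvg]; simpa using h3'
        have hnc : ¬(0 ≤ c.1 ∧ c.1 < N ∧ 0 ≤ c.2 ∧ c.2 < M ∧ c ∉ s) := by
          rintro ⟨_, _, _, _, hns⟩; exact hns h3
        rw [if_pos hA3, if_neg hnc]
        exact ⟨hrel, rfl⟩
      · have h3' : (c.1, c.2) ∉ s := h3
        have hA3 : ¬((vget v c.1 c.2).getD true = true) := by
          rw [hvg]; simpa using h3'
        have hcond : 0 ≤ c.1 ∧ c.1 < N ∧ 0 ≤ c.2 ∧ c.2 < M ∧ c ∉ s :=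
          ⟨hi.1, hi.2, hj.1, hj.2, h3⟩
        rw [if_neg hA3, if_pos hcond]
        have hrel' : RelVS N M (vset v c.1 c.2) (PySem.Set.add s c) :=
          rel_add hrel hi hj
        rw [cellValB_eq_cellVal g c.1 c.2 hi.1 hj.1]
        cases hk : (cellVal g c.1 c.2 == want) <;> simp [hk] <;> first | exact hrel' | exact ⟨hrel', rfl⟩

lemma chain_sim (g : List (List Int)) (want N M : Int) (cs : List (Int × Int)) :
    ∀ (v : List (List Bool)) (s : PySem.Set (Int × Int)) (stack : List (Int × Int)),
      RelVS N M v s →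
      RelVS N M (cs.foldl (fun st c => tStep g (fun x => x == want) N M c.1 c.2 st) (v, stack)).1
          (cs.foldl (bStep g want N M) (s, stack)).1 ∧
      (cs.foldl (fun st c => tStep g (fun x => x == want) N M c.1 c.2 st) (v, stack)).2
        = (cs.foldl (bStep g want N M) (s, stack)).2 := by
  induction cs with
  | nil => exact fun v s stack h => ⟨h, rfl⟩
  | cons c cs ih =>
    intro v s stack hrel
    obtain ⟨r1, e1⟩ := pair_sim g want N M hrel stack c
    simp only [List.foldl_cons]
    have hA : tStep g (fun x => x == want) N M c.1 c.2 (v, stack)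
        = ((tStep g (fun x => x == want) N M c.1 c.2 (v, stack)).1,
           (bStep g want N M (s, stack) c).2) := by rw [← e1]
    have hB : bStep g want N M (s, stack) c
        = ((bStep g want N M (s, stack) c).1, (bStep g want N M (s, stack) c).2) := rfl
    rw [hA, hB]
    exact ih _ _ _ r1

lemma dirs_eq_tStep (g : List (List Int)) (want N M ci cj : Int)
    (st : List (List Bool) × List (Int × Int)) :
    (PySem.List.pyRange 0 4 1).foldl (stepDir g (fun x => x == want) N M ci cj) st
      = ([(ci + 1, cj), (ci - 1, cj), (ci, cj + 1), (ci, cj - 1)]).foldl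
          (fun st c => tStep g (fun x => x == want) N M c.1 c.2 st) st := by
  rw [show PySem.List.pyRange 0 4 1 = [0, 1, 2, 3] from by decide]
  simp only [List.foldl_cons, List.foldl_nil]
  rw [stepDir_eq_tStep 0 1 0 (by decide) (by decide),
      stepDir_eq_tStep 1 (-1) 0 (by decide) (by decide),
      stepDir_eq_tStep 2 0 1 (by decide) (by decide),
      stepDir_eq_tStep 3 0 (-1) (by decide) (by decide)]
  norm_num [sub_eq_add_neg]

lemma fill_sim (g : List (List Int)) (want N M oi oj : Int)
    (v : List (List Bool)) (stack acc : List (Int × Int)) :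
    ∀ s, RelVS N M v s →
      RelVS N M (dfsLoop g (fun x => x == want) N M oi oj v stack acc).1
          (bFill g want N M oi oj s stack acc).1 ∧
      (dfsLoop g (fun x => x == want) N M oi oj v stack acc).2
        = (bFill g want N M oi oj s stack acc).2 := by
  fun_induction dfsLoop with
  | case1 =>
    intro s hrel
    rw [bFill]
    exact ⟨hrel, rfl⟩
  | case2 v acc c rest acc' st ih =>
    intro s hrel
    have hst : st = (PySem.List.pyRange 0 4 1).foldl
        (stepDir g (fun x => x == want) N M c.1 c.2) (v, rest) := rfl
    have hacc : acc' = acc ++ [(c.1 - oi, c.2 - oj)] := rfl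
    have hd := dirs_eq_tStep g want N M c.1 c.2 (v, rest)
    obtain ⟨r1, e1⟩ := chain_sim g want N M
      [(c.1 + 1, c.2), (c.1 - 1, c.2), (c.1, c.2 + 1), (c.1, c.2 - 1)] v s rest hrel
    rw [← hd] at r1 e1
    rw [← hst] at r1 e1
    rw [bFill]
    show RelVS N M (dfsLoop g (fun x => x == want) N M oi oj st.1 st.2 acc').1
          (bFill g want N M oi oj
            (([(c.1 + 1, c.2), (c.1 - 1, c.2), (c.1, c.2 + 1), (c.1, c.2 - 1)]).foldl
              (bStep g want N M) (s, rest)).1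
            (([(c.1 + 1, c.2), (c.1 - 1, c.2), (c.1, c.2 + 1), (c.1, c.2 - 1)]).foldl
              (bStep g want N M) (s, rest)).2
            (acc ++ [(c.1 - oi, c.2 - oj)])).1 ∧
        (dfsLoop g (fun x => x == want) N M oi oj st.1 st.2 acc').2
          = (bFill g want N M oi oj
            (([(c.1 + 1, c.2), (c.1 - 1, c.2), (c.1, c.2 + 1), (c.1, c.2 - 1)]).foldl
              (bStep g want N M) (s, rest)).1
            (([(c.1 + 1, c.2), (c.1 - 1, c.2), (c.1, c.2 + 1), (c.1, c.2 - 1)]).foldl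
              (bStep g want N M) (s, rest)).2
            (acc ++ [(c.1 - oi, c.2 - oj)])).2
    rw [← e1, ← hacc]
    exact ih _ r1

lemma cell_sim (g : List (List Int)) (want N M : Int)
    {v : List (List Bool)} {s : PySem.Set (Int × Int)}
    (comps : List (List (Int × Int))) (hrel : RelVS N M v s) (c : Int × Int)
    (hc : 0 ≤ c.1 ∧ c.1 < N ∧ 0 ≤ c.2 ∧ c.2 < M) :
    RelVS N M (scanCell g (fun x => x == want) N M (v, comps) c).1
        (bScanCell g want N M (s, comps) c.1 c.2).1 ∧
    (scanCell g (fun x => x == want) N M (v, comps) c).2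
      = (bScanCell g want N M (s, comps) c.1 c.2).2 := by
  unfold scanCell bScanCell
  have hvg := hrel.2 c.1 c.2 hc.1 hc.2.1 hc.2.2.1 hc.2.2.2
  by_cases h3 : (c.1, c.2) ∈ s
  · rw [if_pos (by rw [hvg]; simpa using h3), if_pos h3]
    exact ⟨hrel, rfl⟩
  · rw [if_neg (by rw [hvg]; simpa using h3), if_neg h3]
    have hrel' : RelVS N M (vset v c.1 c.2) (PySem.Set.add s (c.1, c.2)) :=
      rel_add hrel ⟨hc.1, hc.2.1⟩ ⟨hc.2.2.1, hc.2.2.2⟩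
    rw [cellValB_eq_cellVal g c.1 c.2 hc.1 hc.2.2.1]
    by_cases hk : cellVal g c.1 c.2 == want
    · rw [if_pos hk, if_pos hk]
      obtain ⟨r2, e2⟩ := fill_sim g want N M c.1 c.2 (vset v c.1 c.2)
        [(c.1, c.2)] [] (PySem.Set.add s (c.1, c.2)) hrel'
      refine ⟨r2, ?_⟩
      show comps ++ [(dfsLoop g (fun x => x == want) N M c.1 c.2 (vset v c.1 c.2) [(c.1, c.2)] []).2]
          = comps ++ [(bFill g want N M c.1 c.2 (PySem.Set.add s (c.1, c.2)) [(c.1, c.2)] []).2]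
      rw [e2]
    · rw [if_neg hk, if_neg hk]
      exact ⟨hrel', rfl⟩

lemma scanList_sim (g : List (List Int)) (want N M : Int) (cs : List (Int × Int)) :
    ∀ (v : List (List Bool)) (s : PySem.Set (Int × Int)) (comps : List (List (Int × Int))),
      RelVS N M v s → (∀ c ∈ cs, 0 ≤ c.1 ∧ c.1 < N ∧ 0 ≤ c.2 ∧ c.2 < M) →
      RelVS N M (cs.foldl (scanCell g (fun x => x == want) N M) (v, comps)).1
          (cs.foldl (fun st c => bScanCell g want N M st c.1 c.2) (s, comps)).1 ∧
      (cs.foldl (scanCell g (fun x => x == want) N M) (v, comps)).2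
        = (cs.foldl (fun st c => bScanCell g want N M st c.1 c.2) (s, comps)).2 := by
  induction cs with
  | nil => exact fun v s comps h _ => ⟨h, rfl⟩
  | cons c cs ih =>
    intro v s comps hrel hin
    obtain ⟨r1, e1⟩ := cell_sim g want N M comps hrel c (hin c List.mem_cons_self)
    simp only [List.foldl_cons]
    have hA : scanCell g (fun x => x == want) N M (v, comps) c
        = ((scanCell g (fun x => x == want) N M (v, comps) c).1,
           (bScanCell g want N M (s, comps) c.1 c.2).2) := by rw [← e1]
    have hB : bScanCell g want N M (s, comps) c.1 c.2
        = ((bScanCell g want N M (s, comps) c.1 c.2).1,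
           (bScanCell g want N M (s, comps) c.1 c.2).2) := rfl
    rw [hA, hB]
    exact ih _ _ _ r1 (fun e he => hin e (List.mem_cons_of_mem _ he))

lemma getD_replicate' {α : Type} (n : Nat) (a d : α) (m : Nat) :
    (List.replicate n a).getD m d = if m < n then a else d := by
  rw [List.getD_eq_getElem?_getD, List.getElem?_replicate]
  by_cases h : m < n
  · rw [if_pos h, if_pos h]; rfl
  · rw [if_neg h, if_neg h]; rfl

lemma rel_init (N M : Int) :
    RelVS N M (List.replicate N.toNat (List.replicate M.toNat false)) PySem.Set.empty := by
  have hs : ShapeB N M (List.replicate N.toNat (List.replicate M.toNat false)) := by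
    constructor
    · simp
    · intro r hr; rw [List.eq_of_mem_replicate hr]; simp
  refine ⟨hs, ?_⟩
  intro i j hi1 hi2 hj1 hj2
  rw [vget_getD_eq hs ⟨hi1, hi2⟩ ⟨hj1, hj2⟩]
  rw [getD_replicate' _ _ _ _, if_pos (by omega), getD_replicate' _ _ _ _, if_pos (by omega)]
  simp [PySem.Set.empty]

lemma bComponents_eq (g : List (List Int)) (want : Int) :
    bComponents g want = scanComp g (fun x => x == want) := by
  unfold bComponents scanComp
  simp only
  have hnest : ∀ (cs : List Int) (st : PySem.Set (Int × Int) × List (List (Int × Int))),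
      cs.foldl (fun st i =>
          (PySem.List.pyRange 0 ((PySem.List.pyGetD g 0 []).length : Int) 1).foldl
            (fun st j => bScanCell g want (g.length : Int)
              ((PySem.List.pyGetD g 0 []).length : Int) st i j) st) st
        = (cs.flatMap (fun i =>
            (PySem.List.pyRange 0 ((PySem.List.pyGetD g 0 []).length : Int) 1).map
              (fun j => (i, j)))).foldl
            (fun st c => bScanCell g want (g.length : Int)
              ((PySem.List.pyGetD g 0 []).length : Int) st c.1 c.2) st := by
    intro cs
    induction cs with
    | nil => intro st; simp
    | cons i cs ih =>
      intro st
      simp only [List.foldl_cons, List.flatMap_cons, List.foldl_append, ih, List.foldl_map]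
  rw [hnest]
  have hin : ∀ c ∈ ((PySem.List.pyRange 0 (g.length : Int) 1).flatMap
      (fun i => (PySem.List.pyRange 0 ((PySem.List.pyGetD g 0 []).length : Int) 1).map
        (fun j => (i, j)))),
      0 ≤ c.1 ∧ c.1 < (g.length : Int) ∧ 0 ≤ c.2 ∧ c.2 < ((PySem.List.pyGetD g 0 []).length : Int) := by
    intro c hc
    rw [List.mem_flatMap] at hc
    obtain ⟨i, hi, hc⟩ := hc
    rw [List.mem_map] at hc
    obtain ⟨j, hj, rfl⟩ := hc
    rw [PySem.List.mem_pyRange_one] at hi hj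
    exact ⟨hi.1, hi.2, hj.1, hj.2⟩
  obtain ⟨_, e⟩ := scanList_sim g want (g.length : Int)
    ((PySem.List.pyGetD g 0 []).length : Int)
    ((PySem.List.pyRange 0 (g.length : Int) 1).flatMap
      (fun i => (PySem.List.pyRange 0 ((PySem.List.pyGetD g 0 []).length : Int) 1).map
        (fun j => (i, j))))
    (List.replicate ((g.length : Int)).toNat
      (List.replicate (((PySem.List.pyGetD g 0 []).length : Int)).toNat false))
    PySem.Set.empty [] (rel_init _ _) hin
  exact e.symm

-- ---------- Part 1: grid infrastructure ----------

def Shape (g : List (List Int)) (H W : Nat) : Prop :=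
  g.length = H ∧ ∀ r ∈ g, r.length = W

def upd (g : List (List Int)) (i j v : Int) : List (List Int) :=
  PySem.List.pySetD g i (PySem.List.pySetD (PySem.List.pyGetD g i []) j v)

lemma shape_replicate (H W : Nat) (z : Int) :
    Shape (List.replicate H (List.replicate W z)) H W := by
  constructor
  · simp
  · intro r hr; rw [List.eq_of_mem_replicate hr]; simp

lemma cellVal_of_nonneg (g : List (List Int)) {y x : Int} (hy : 0 ≤ y) (hx : 0 ≤ x) :
    cellVal g y x = (g.getD y.toNat []).getD x.toNat 0 := by
  unfold cellVal
  rw [PySem.List.pyGetD_of_nonneg _ _ hy, PySem.List.pyGetD_of_nonneg _ _ hx]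

lemma grid_ext {gA gB : List (List Int)} {H W : Nat} (hg : Shape gA H W) (hh : Shape gB H W)
    (hval : ∀ y x : Int, 0 ≤ y → y < H → 0 ≤ x → x < W → cellVal gA y x = cellVal gB y x) :
    gA = gB := by
  obtain ⟨hgl, hgr⟩ := hg
  obtain ⟨hhl, hhr⟩ := hh
  apply List.ext_getElem (by omega)
  intro i hi1 hi2
  have hrg : gA[i].length = W := hgr _ (List.getElem_mem hi1)
  have hrh : gB[i].length = W := hhr _ (List.getElem_mem hi2)
  apply List.ext_getElem (by omega)
  intro j hj1 hj2
  have hv := hval i j (by positivity) (by exact_mod_cast (by omega : i < H)) (by positivity)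
    (by exact_mod_cast (by omega : j < W))
  rw [cellVal_of_nonneg _ (by positivity) (by positivity),
      cellVal_of_nonneg _ (by positivity) (by positivity)] at hv
  simp only [Int.toNat_natCast] at hv
  rw [show gA.getD i [] = gA[i] from List.getD_eq_getElem _ _ (by omega),
      show gB.getD i [] = gB[i] from List.getD_eq_getElem _ _ (by omega),
      show gA[i].getD j 0 = gA[i][j] from List.getD_eq_getElem _ _ (by omega),
      show gB[i].getD j 0 = gB[i][j] from List.getD_eq_getElem _ _ (by omega)] at hv
  exact hv

lemma shape_upd {g : List (List Int)} {H W : Nat} (hg : Shape g H W) {i j : Int} (v : Int)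
    (hi0 : 0 ≤ i) (hiH : i < H) (hj0 : 0 ≤ j) : Shape (upd g i j v) H W := by
  obtain ⟨hl, hr⟩ := hg
  unfold upd
  rw [PySem.List.pySetD_of_nonneg _ _ hi0, PySem.List.pySetD_of_nonneg _ _ hj0]
  constructor
  · simp [hl]
  · intro r hr'
    rcases List.mem_or_eq_of_mem_set hr' with h | h
    · exact hr _ h
    · subst h
      simp only [List.length_set]
      rw [PySem.List.pyGetD_of_nonneg _ _ hi0, List.getD_eq_getElem _ _ (by omega)]
      exact hr _ (List.getElem_mem _)

lemma cellVal_upd {g : List (List Int)} {H W : Nat} (hg : Shape g H W) {i j y x : Int} (v : Int)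
    (hi : 0 ≤ i ∧ i < H) (hj : 0 ≤ j ∧ j < W) (hy : 0 ≤ y ∧ y < H) (hx : 0 ≤ x ∧ x < W) :
    cellVal (upd g i j v) y x = if y = i ∧ x = j then v else cellVal g y x := by
  obtain ⟨hl, hr⟩ := hg
  have hrow : (g.getD i.toNat []).length = W := by
    rw [List.getD_eq_getElem _ _ (by omega)]; exact hr _ (List.getElem_mem _)
  unfold upd
  rw [PySem.List.pySetD_of_nonneg _ _ hi.1, PySem.List.pySetD_of_nonneg _ _ hj.1,
      PySem.List.pyGetD_of_nonneg _ _ hi.1]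
  rw [cellVal_of_nonneg _ hy.1 hx.1, cellVal_of_nonneg _ hy.1 hx.1]
  rw [getD_set_eq _ _ _ _ _ (by omega)]
  by_cases hyi : y = i
  · rw [if_pos (by omega : i.toNat = y.toNat)]
    rw [getD_set_eq _ _ _ _ _ (by omega)]
    by_cases hxj : x = j
    · rw [if_pos (by omega : j.toNat = x.toNat), if_pos ⟨hyi, hxj⟩]
    · rw [if_neg (by omega : ¬ j.toNat = x.toNat), if_neg (by simp [hxj])]
      rw [hyi]
  · rw [if_neg (by omega : ¬ i.toNat = y.toNat), if_neg (by simp [hyi])]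

lemma shape_mk (f : Int → Int → Int) (H W : Int) :
    Shape ((PySem.List.pyRange 0 H 1).map (fun a => (PySem.List.pyRange 0 W 1).map (fun b => f a b)))
      (H - 0).toNat (W - 0).toNat := by
  constructor
  · rw [List.length_map, PySem.List.length_pyRange_one]
  · intro r hr
    obtain ⟨a, _, rfl⟩ := List.mem_map.mp hr
    rw [List.length_map, PySem.List.length_pyRange_one]

lemma cellVal_mk (f : Int → Int → Int) {H W y x : Int}
    (hy : 0 ≤ y ∧ y < H) (hx : 0 ≤ x ∧ x < W) :
    cellVal ((PySem.List.pyRange 0 H 1).map (fun a => (PySem.List.pyRange 0 W 1).map (fun b => f a b))) y x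
      = f y x := by
  unfold cellVal
  rw [show (PySem.List.pyRange 0 H 1) = (PySem.List.pyRange 0 H) from rfl,
      show (PySem.List.pyRange 0 W 1) = (PySem.List.pyRange 0 W) from rfl]
  rw [PySem.List.pyGetD_map_pyRange_of_nonneg _ _ _ _ hy.1 hy.2,
      PySem.List.pyGetD_map_pyRange_of_nonneg _ _ _ _ hx.1 hx.2]

-- first-row length of a shaped grid (what `len(g[0])` reads)
lemma headlen {g : List (List Int)} {H W : Nat} (hg : Shape g H W) (h0 : 0 < H) :
    (PySem.List.pyGetD g 0 []).length = W := by
  obtain ⟨hl, hr⟩ := hg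
  rw [PySem.List.pyGetD_of_nonneg _ _ le_rfl, List.getD_eq_getElem _ _ (by omega)]
  exact hr _ (List.getElem_mem _)

-- ---------- Part 2: every component from the scan contains the relative cell (0,0) ----------

lemma dfsLoop_acc_mono (g : List (List Int)) (keep : Int → Bool) (N M oi oj : Int)
    (v : List (List Bool)) (stack : List (Int × Int)) (acc : List (Int × Int)) :
    ∀ z ∈ acc, z ∈ (dfsLoop g keep N M oi oj v stack acc).2 := by
  fun_induction dfsLoop with
  | case1 => intro z hz; exact hz
  | case2 a b c d e f ih =>
    intro z hz
    exact ih z (List.mem_append_left _ hz)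

lemma zero_mem_dfsLoop (g : List (List Int)) (keep : Int → Bool) (N M i j : Int)
    (v : List (List Bool)) :
    ((0 : Int), (0 : Int)) ∈ (dfsLoop g keep N M i j v [(i, j)] []).2 := by
  rw [dfsLoop]
  simp only
  apply dfsLoop_acc_mono
  simp

lemma scanCell_inv (g : List (List Int)) (keep : Int → Bool) (N M : Int)
    (st : List (List Bool) × List (List (Int × Int))) (ij : Int × Int)
    (h : ∀ c ∈ st.2, ((0:Int),(0:Int)) ∈ c) :
    ∀ c ∈ (scanCell g keep N M st ij).2, ((0:Int),(0:Int)) ∈ c := by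
  intro c hc
  unfold scanCell at hc
  split_ifs at hc with h1 h2
  · exact h c hc
  · simp only [List.mem_append, List.mem_singleton] at hc
    rcases hc with h' | h'
    · exact h c h'
    · subst h'; exact zero_mem_dfsLoop _ _ _ _ _ _ _
  · exact h c hc

lemma zero_mem_scanComp (g : List (List Int)) (keep : Int → Bool) :
    ∀ c ∈ scanComp g keep, ((0 : Int), (0 : Int)) ∈ c := by
  unfold scanComp
  simp only
  generalize ((PySem.List.pyRange 0 (g.length : Int) 1).flatMap
      (fun i => (PySem.List.pyRange 0 ((PySem.List.pyGetD g 0 []).length : Int) 1).map (fun j => (i, j)))) = idx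
  have hstep : ∀ (idx : List (Int × Int)) (st : List (List Bool) × List (List (Int × Int))),
      (∀ c ∈ st.2, ((0:Int),(0:Int)) ∈ c) →
      ∀ c ∈ (List.foldl (scanCell g keep (g.length : Int) ((PySem.List.pyGetD g 0 []).length : Int)) st idx).2,
        ((0:Int),(0:Int)) ∈ c := by
    intro idx
    induction idx with
    | nil => intro st h c hc; exact h c hc
    | cons ij idx ih =>
      intro st h c hc
      exact ih _ (scanCell_inv _ _ _ _ _ _ h) c hc
  exact hstep idx _ (by simp)

-- ---------- Part 3: the two bounding-box computations agree ----------

def aMinY (p : List (Int × Int)) : Int := p.foldl (fun a c => min a c.1) 99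
def aMaxY (p : List (Int × Int)) : Int := p.foldl (fun a c => max a c.1) 0
def aMinX (p : List (Int × Int)) : Int := p.foldl (fun a c => min a c.2) 99
def aMaxX (p : List (Int × Int)) : Int := p.foldl (fun a c => max a c.2) 0

lemma tupleFold (p : List (Int × Int)) :
    ∀ a b c d : Int,
      p.foldl (fun (s : Int × Int × Int × Int) e =>
        (min s.1 e.1, max s.2.1 e.1, min s.2.2.1 e.2, max s.2.2.2 e.2)) (a, b, c, d)
      = (p.foldl (fun v e => min v e.1) a, p.foldl (fun v e => max v e.1) b,
         p.foldl (fun v e => min v e.2) c, p.foldl (fun v e => max v e.2) d) := by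
  induction p with
  | nil => intro a b c d; rfl
  | cons e p ih => intro a b c d; simp only [List.foldl_cons]; exact ih _ _ _ _

lemma aMinY_le (p : List (Int × Int)) : ∀ c ∈ p, aMinY p ≤ c.1 := by
  intro c hc
  have h := (PySem.List.foldl_min_le (p.map (fun c => c.1)) 99).2
  rw [List.foldl_map] at h
  exact h _ (List.mem_map_of_mem hc)

lemma aMinX_le (p : List (Int × Int)) : ∀ c ∈ p, aMinX p ≤ c.2 := by
  intro c hc
  have h := (PySem.List.foldl_min_le (p.map (fun c => c.2)) 99).2
  rw [List.foldl_map] at h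
  exact h _ (List.mem_map_of_mem hc)

lemma le_aMaxY (p : List (Int × Int)) : ∀ c ∈ p, c.1 ≤ aMaxY p := by
  intro c hc
  have h := (PySem.List.le_foldl_max (p.map (fun c => c.1)) 0).2
  rw [List.foldl_map] at h
  exact h _ (List.mem_map_of_mem hc)

lemma le_aMaxX (p : List (Int × Int)) : ∀ c ∈ p, c.2 ≤ aMaxX p := by
  intro c hc
  have h := (PySem.List.le_foldl_max (p.map (fun c => c.2)) 0).2
  rw [List.foldl_map] at h
  exact h _ (List.mem_map_of_mem hc)

lemma min_unique {l : List Int} {m1 m2 : Int} (h1 : m1 ∈ l) (h2 : m2 ∈ l)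
    (b1 : ∀ y ∈ l, m1 ≤ y) (b2 : ∀ y ∈ l, m2 ≤ y) : m1 = m2 :=
  le_antisymm (b1 _ h2) (b2 _ h1)

lemma aMinY_mem {p : List (Int × Int)} (h0 : ((0:Int),(0:Int)) ∈ p) :
    aMinY p ∈ p.map (fun c => c.1) := by
  have hle : aMinY p ≤ 0 := aMinY_le p _ h0
  have h := PySem.List.foldl_min_mem (p.map (fun c => c.1)) 99
  rw [List.foldl_map] at h
  rcases h with h | h
  · exfalso; unfold aMinY at hle; omega
  · exact h

lemma aMinX_mem {p : List (Int × Int)} (h0 : ((0:Int),(0:Int)) ∈ p) :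
    aMinX p ∈ p.map (fun c => c.2) := by
  have hle : aMinX p ≤ 0 := aMinX_le p _ h0
  have h := PySem.List.foldl_min_mem (p.map (fun c => c.2)) 99
  rw [List.foldl_map] at h
  rcases h with h | h
  · exfalso; unfold aMinX at hle; omega
  · exact h

lemma aMaxY_mem {p : List (Int × Int)} (h0 : ((0:Int),(0:Int)) ∈ p) :
    aMaxY p ∈ p.map (fun c => c.1) := by
  have hge : 0 ≤ aMaxY p := le_aMaxY p _ h0
  have h := PySem.List.foldl_max_mem (p.map (fun c => c.1)) 0
  rw [List.foldl_map] at h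
  rcases h with h | h
  · unfold aMaxY; rw [h]; exact List.mem_map_of_mem h0
  · exact h

lemma aMaxX_mem {p : List (Int × Int)} (h0 : ((0:Int),(0:Int)) ∈ p) :
    aMaxX p ∈ p.map (fun c => c.2) := by
  have hge : 0 ≤ aMaxX p := le_aMaxX p _ h0
  have h := PySem.List.foldl_max_mem (p.map (fun c => c.2)) 0
  rw [List.foldl_map] at h
  rcases h with h | h
  · unfold aMaxX; rw [h]; exact List.mem_map_of_mem h0
  · exact h

-- B-side bounding box accessors
def bMinY (p : List (Int × Int)) : Int := (PySem.List.min? (p.map (fun c => c.1)) (fun y => y)).getD 0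
def bMinX (p : List (Int × Int)) : Int := (PySem.List.min? (p.map (fun c => c.2)) (fun y => y)).getD 0
def bMaxY (p : List (Int × Int)) : Int := (PySem.List.max? (p.map (fun c => c.1)) (fun y => y)).getD 0
def bMaxX (p : List (Int × Int)) : Int := (PySem.List.max? (p.map (fun c => c.2)) (fun y => y)).getD 0

lemma bMinY_eq {p : List (Int × Int)} (h0 : ((0:Int),(0:Int)) ∈ p) : bMinY p = aMinY p := by
  have hne : p.map (fun c => c.1) ≠ [] := by
    intro h; rw [List.map_eq_nil_iff] at h; subst h; simp at h0
  cases hm : PySem.List.min? (p.map (fun c => c.1)) (fun y => y) with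
  | none => exact absurd ((PySem.List.min?_eq_none_iff _ _).mp hm) hne
  | some m =>
    unfold bMinY; rw [hm]
    refine min_unique (PySem.List.min?_mem hm) (aMinY_mem h0)
      (fun y hy => PySem.List.min?_isMin hm y hy) ?_
    intro y hy
    obtain ⟨c, hc, rfl⟩ := List.mem_map.mp hy
    exact aMinY_le p c hc

lemma bMinX_eq {p : List (Int × Int)} (h0 : ((0:Int),(0:Int)) ∈ p) : bMinX p = aMinX p := by
  have hne : p.map (fun c => c.2) ≠ [] := by
    intro h; rw [List.map_eq_nil_iff] at h; subst h; simp at h0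
  cases hm : PySem.List.min? (p.map (fun c => c.2)) (fun y => y) with
  | none => exact absurd ((PySem.List.min?_eq_none_iff _ _).mp hm) hne
  | some m =>
    unfold bMinX; rw [hm]
    refine min_unique (PySem.List.min?_mem hm) (aMinX_mem h0)
      (fun y hy => PySem.List.min?_isMin hm y hy) ?_
    intro y hy
    obtain ⟨c, hc, rfl⟩ := List.mem_map.mp hy
    exact aMinX_le p c hc

lemma bMaxY_eq {p : List (Int × Int)} (h0 : ((0:Int),(0:Int)) ∈ p) : bMaxY p = aMaxY p := by
  have hne : p.map (fun c => c.1) ≠ [] := by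
    intro h; rw [List.map_eq_nil_iff] at h; subst h; simp at h0
  cases hm : PySem.List.max? (p.map (fun c => c.1)) (fun y => y) with
  | none => exact absurd ((PySem.List.max?_eq_none_iff _ _).mp hm) hne
  | some m =>
    unfold bMaxY; rw [hm]
    refine le_antisymm ?_ ?_
    · obtain ⟨c, hc, h⟩ := List.mem_map.mp (PySem.List.max?_mem hm)
      rw [← h]; exact le_aMaxY p c hc
    · obtain ⟨c, hc, h⟩ := List.mem_map.mp (aMaxY_mem h0)
      calc aMaxY p = c.1 := h.symm
        _ ≤ m := PySem.List.max?_isMax hm _ (List.mem_map_of_mem hc)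

lemma bMaxX_eq {p : List (Int × Int)} (h0 : ((0:Int),(0:Int)) ∈ p) : bMaxX p = aMaxX p := by
  have hne : p.map (fun c => c.2) ≠ [] := by
    intro h; rw [List.map_eq_nil_iff] at h; subst h; simp at h0
  cases hm : PySem.List.max? (p.map (fun c => c.2)) (fun y => y) with
  | none => exact absurd ((PySem.List.max?_eq_none_iff _ _).mp hm) hne
  | some m =>
    unfold bMaxX; rw [hm]
    refine le_antisymm ?_ ?_
    · obtain ⟨c, hc, h⟩ := List.mem_map.mp (PySem.List.max?_mem hm)
      rw [← h]; exact le_aMaxX p c hc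
    · obtain ⟨c, hc, h⟩ := List.mem_map.mp (aMaxX_mem h0)
      calc aMaxX p = c.2 := h.symm
        _ ≤ m := PySem.List.max?_isMax hm _ (List.mem_map_of_mem hc)

-- ---------- Part 4: toSquares = gridB on any cell list containing (0,0) ----------

lemma fold_write (p : List (Int × Int)) (mY mX : Int) (H W : Nat) :
    ∀ (sq : List (List Int)), Shape sq H W →
    (∀ c ∈ p, 0 ≤ c.1 - mY ∧ c.1 - mY < H ∧ 0 ≤ c.2 - mX ∧ c.2 - mX < W) →
    Shape (p.foldl (fun sq c => upd sq (c.1 - mY) (c.2 - mX) 1) sq) H W ∧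
    (∀ y x : Int, 0 ≤ y → y < H → 0 ≤ x → x < W →
      cellVal (p.foldl (fun sq c => upd sq (c.1 - mY) (c.2 - mX) 1) sq) y x
        = if (y + mY, x + mX) ∈ p then 1 else cellVal sq y x) := by
  induction p with
  | nil => intro sq hs _; exact ⟨hs, fun y x _ _ _ _ => by simp⟩
  | cons c p ih =>
    intro sq hs hb
    have hc := hb c (List.mem_cons_self)
    have hs' : Shape (upd sq (c.1 - mY) (c.2 - mX) 1) H W :=
      shape_upd hs 1 hc.1 hc.2.1 hc.2.2.1
    obtain ⟨ihS, ihV⟩ := ih (upd sq (c.1 - mY) (c.2 - mX) 1) hs'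
      (fun e he => hb e (List.mem_cons_of_mem _ he))
    refine ⟨by simpa using ihS, ?_⟩
    intro y x hy1 hy2 hx1 hx2
    simp only [List.foldl_cons]
    rw [ihV y x hy1 hy2 hx1 hx2]
    rw [cellVal_upd hs 1 ⟨hc.1, hc.2.1⟩ ⟨hc.2.2.1, hc.2.2.2⟩ ⟨hy1, hy2⟩ ⟨hx1, hx2⟩]
    by_cases hmem : (y + mY, x + mX) ∈ p
    · rw [if_pos hmem, if_pos (List.mem_cons_of_mem _ hmem)]
    · rw [if_neg hmem]
      by_cases heq : y = c.1 - mY ∧ x = c.2 - mX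
      · have hcm : (y + mY, x + mX) ∈ c :: p := by
          rcases c with ⟨c1, c2⟩
          apply List.mem_cons.mpr
          left
          simp only [Prod.mk.injEq]
          simp only [Prod.fst, Prod.snd] at heq
          constructor <;> omega
        rw [if_pos heq, if_pos hcm]
      · rw [if_neg heq, if_neg (by
          intro hmem'
          rcases List.mem_cons.mp hmem' with h | h
          · apply heq
            have h1 : y + mY = c.1 := congrArg Prod.fst h
            have h2 : x + mX = c.2 := congrArg Prod.snd h
            omega
          · exact hmem h)]

lemma cellVal_replicate (H W : Nat) (z : Int) {y x : Int} (hy : 0 ≤ y) (hx : 0 ≤ x) :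
    cellVal (List.replicate H (List.replicate W z)) y x
      = if y < H ∧ x < W then z else 0 := by
  rw [cellVal_of_nonneg _ hy hx, getD_replicate']
  by_cases h1 : y.toNat < H
  · rw [if_pos h1, getD_replicate']
    by_cases h2 : x.toNat < W
    · rw [if_pos h2, if_pos ⟨by omega, by omega⟩]
    · rw [if_neg h2, if_neg (by omega)]
  · rw [if_neg h1, List.getD_nil, if_neg (by omega)]

lemma toSquares_unfold (p : List (Int × Int)) :
    toSquares p = p.foldl (fun sq c => upd sq (c.1 - aMinY p) (c.2 - aMinX p) 1)
      (List.replicate (aMaxY p - aMinY p + 1).toNat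
        (List.replicate (aMaxX p - aMinX p + 1).toNat 0)) := by
  unfold toSquares upd
  rw [tupleFold]
  rfl

lemma gridB_unfold (p : List (Int × Int)) :
    gridB p = (PySem.List.pyRange 0 (bMaxY p - bMinY p + 1) 1).map (fun y =>
      (PySem.List.pyRange 0 (bMaxX p - bMinX p + 1) 1).map (fun x =>
        if (bMinY p + y, bMinX p + x) ∈ PySem.Set.ofList p then (1 : Int) else 0)) := rfl

lemma toSquares_shape {p : List (Int × Int)} (h0 : ((0:Int),(0:Int)) ∈ p) :
    Shape (toSquares p) (aMaxY p - aMinY p + 1).toNat (aMaxX p - aMinX p + 1).toNat ∧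
    (∀ y x : Int, 0 ≤ y → y < (aMaxY p - aMinY p + 1).toNat → 0 ≤ x → x < (aMaxX p - aMinX p + 1).toNat →
      cellVal (toSquares p) y x = if (y + aMinY p, x + aMinX p) ∈ p then 1 else 0) := by
  have hminY : aMinY p ≤ 0 := aMinY_le p _ h0
  have hminX : aMinX p ≤ 0 := aMinX_le p _ h0
  have hmaxY : 0 ≤ aMaxY p := le_aMaxY p _ h0
  have hmaxX : 0 ≤ aMaxX p := le_aMaxX p _ h0
  have hb : ∀ c ∈ p, 0 ≤ c.1 - aMinY p ∧ c.1 - aMinY p < (aMaxY p - aMinY p + 1).toNat ∧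
      0 ≤ c.2 - aMinX p ∧ c.2 - aMinX p < (aMaxX p - aMinX p + 1).toNat := by
    intro c hc
    have := aMinY_le p c hc
    have := aMinX_le p c hc
    have := le_aMaxY p c hc
    have := le_aMaxX p c hc
    omega
  obtain ⟨hS, hV⟩ := fold_write p (aMinY p) (aMinX p) _ _ _
    (shape_replicate _ _ 0) hb
  rw [toSquares_unfold]
  refine ⟨hS, ?_⟩
  intro y x hy1 hy2 hx1 hx2
  rw [hV y x hy1 hy2 hx1 hx2, cellVal_replicate _ _ _ hy1 hx1]
  split_ifs <;> rfl

lemma toSquares_eq_gridB {p : List (Int × Int)} (h0 : ((0:Int),(0:Int)) ∈ p) :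
    toSquares p = gridB p := by
  have hminY : aMinY p ≤ 0 := aMinY_le p _ h0
  have hminX : aMinX p ≤ 0 := aMinX_le p _ h0
  have hmaxY : 0 ≤ aMaxY p := le_aMaxY p _ h0
  have hmaxX : 0 ≤ aMaxX p := le_aMaxX p _ h0
  obtain ⟨hS, hV⟩ := toSquares_shape h0
  rw [gridB_unfold]
  simp only [bMinY_eq h0, bMinX_eq h0, bMaxY_eq h0, bMaxX_eq h0]
  have hBs := shape_mk (fun y x => if (aMinY p + y, aMinX p + x) ∈ PySem.Set.ofList p then (1:Int) else 0)
    (aMaxY p - aMinY p + 1) (aMaxX p - aMinX p + 1)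
  simp only [Int.sub_zero] at hBs
  refine grid_ext hS hBs ?_
  intro y x hy1 hy2 hx1 hx2
  rw [hV y x hy1 hy2 hx1 hx2]
  rw [cellVal_mk _ ⟨hy1, by omega⟩ ⟨hx1, by omega⟩]
  have h1 : aMinY p + y = y + aMinY p := by ring
  have h2 : aMinX p + x = x + aMinX p := by ring
  simp only [h1, h2, PySem.Set.mem_ofList]

-- ---------- Part 5: the two rotations agree; rotating four times is the identity ----------

lemma rotB_unfold {g : List (List Int)} {H W : Nat} (hg : Shape g H W) (hH : 0 < H) :
    rotB g = (PySem.List.pyRange 0 (W : Int) 1).map (fun a =>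
      (PySem.List.pyRange 0 (H : Int) 1).map (fun b => cellVal g ((H : Int) - 1 - b) a)) := by
  unfold rotB
  rw [hg.1, headlen hg hH]
  refine List.map_congr_left ?_
  intro a ha
  refine List.map_congr_left ?_
  intro b hb
  rw [PySem.List.mem_pyRange_one] at ha hb
  exact cellValB_eq_cellVal g _ _ (by omega) ha.1

lemma rotB_shape {g : List (List Int)} {H W : Nat} (hg : Shape g H W) (hH : 0 < H) :
    Shape (rotB g) W H := by
  rw [rotB_unfold hg hH]
  have := shape_mk (fun a b => cellVal g ((H : Int) - 1 - b) a) (W : Int) (H : Int)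
  simpa using this

lemma cellVal_rotB {g : List (List Int)} {H W : Nat} (hg : Shape g H W) (hH : 0 < H)
    {a b : Int} (ha : 0 ≤ a ∧ a < W) (hb : 0 ≤ b ∧ b < H) :
    cellVal (rotB g) a b = cellVal g ((H : Int) - 1 - b) a := by
  rw [rotB_unfold hg hH]
  exact cellVal_mk _ ha hb

lemma rotB_four {g : List (List Int)} {H W : Nat} (hg : Shape g H W) (hH : 0 < H) (hW : 0 < W) :
    rotB (rotB (rotB (rotB g))) = g := by
  have h1 := rotB_shape hg hH
  have h2 := rotB_shape h1 hW
  have h3 := rotB_shape h2 hH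
  have h4 := rotB_shape h3 hW
  refine grid_ext h4 hg ?_
  intro y x hy1 hy2 hx1 hx2
  rw [cellVal_rotB h3 hW ⟨hy1, hy2⟩ ⟨hx1, hx2⟩]
  rw [cellVal_rotB h2 hH ⟨by omega, by omega⟩ ⟨hy1, hy2⟩]
  rw [cellVal_rotB h1 hW ⟨by omega, by omega⟩ ⟨by omega, by omega⟩]
  rw [cellVal_rotB hg hH ⟨by omega, by omega⟩ ⟨by omega, by omega⟩]
  congr 1 <;> omega

lemma rotA_inner (g : List (List Int)) (H W : Nat) (y : Int) (hy : 0 ≤ y ∧ y < H) :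
    ∀ (xs : List Int) (r : List (List Int)), Shape r W H → (∀ x ∈ xs, 0 ≤ x ∧ x < W) →
    Shape (xs.foldl (fun r x => upd r x ((H : Int) - y - 1) (cellVal g y x)) r) W H ∧
    (∀ a b : Int, 0 ≤ a → a < W → 0 ≤ b → b < H →
      cellVal (xs.foldl (fun r x => upd r x ((H : Int) - y - 1) (cellVal g y x)) r) a b
        = if a ∈ xs ∧ b = (H : Int) - y - 1 then cellVal g y a else cellVal r a b) := by
  intro xs
  induction xs with
  | nil =>
    intro r hr _
    exact ⟨hr, fun a b _ _ _ _ => by simp⟩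
  | cons x xs ih =>
    intro r hr hxs
    have hx := hxs x List.mem_cons_self
    have hr' : Shape (upd r x ((H : Int) - y - 1) (cellVal g y x)) W H :=
      shape_upd hr _ hx.1 hx.2 (by omega)
    obtain ⟨ihS, ihV⟩ := ih _ hr' (fun e he => hxs e (List.mem_cons_of_mem _ he))
    refine ⟨by simpa using ihS, ?_⟩
    intro a b ha1 ha2 hb1 hb2
    simp only [List.foldl_cons]
    rw [ihV a b ha1 ha2 hb1 hb2]
    rw [cellVal_upd hr _ ⟨hx.1, hx.2⟩ ⟨by omega, by omega⟩ ⟨ha1, ha2⟩ ⟨hb1, hb2⟩]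
    by_cases hmem : a ∈ xs ∧ b = (H : Int) - y - 1
    · rw [if_pos hmem, if_pos ⟨List.mem_cons_of_mem _ hmem.1, hmem.2⟩]
    · rw [if_neg hmem]
      by_cases heq : a = x ∧ b = (H : Int) - y - 1
      · rw [if_pos heq, if_pos ⟨List.mem_cons.mpr (Or.inl heq.1), heq.2⟩, heq.1]
      · rw [if_neg heq, if_neg (by
          intro hc
          rcases List.mem_cons.mp hc.1 with h | h
          · exact heq ⟨h, hc.2⟩
          · exact hmem ⟨h, hc.2⟩)]

lemma rotA_outer (g : List (List Int)) (H W : Nat) :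
    ∀ (ys : List Int) (r : List (List Int)), Shape r W H → (∀ y ∈ ys, 0 ≤ y ∧ y < H) →
    Shape (ys.foldl (fun r y => (PySem.List.pyRange 0 (W : Int) 1).foldl
        (fun r x => upd r x ((H : Int) - y - 1) (cellVal g y x)) r) r) W H ∧
    (∀ a b : Int, 0 ≤ a → a < W → 0 ≤ b → b < H →
      cellVal (ys.foldl (fun r y => (PySem.List.pyRange 0 (W : Int) 1).foldl
          (fun r x => upd r x ((H : Int) - y - 1) (cellVal g y x)) r) r) a b
        = if ((H : Int) - 1 - b) ∈ ys then cellVal g ((H : Int) - 1 - b) a else cellVal r a b) := by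
  intro ys
  induction ys with
  | nil =>
    intro r hr _
    exact ⟨hr, fun a b _ _ _ _ => by simp⟩
  | cons y ys ih =>
    intro r hr hys
    have hy := hys y List.mem_cons_self
    obtain ⟨innS, innV⟩ := rotA_inner g H W y hy (PySem.List.pyRange 0 (W : Int) 1) r hr
      (fun x hx => by rw [PySem.List.mem_pyRange_one] at hx; exact hx)
    obtain ⟨ihS, ihV⟩ := ih _ innS (fun e he => hys e (List.mem_cons_of_mem _ he))
    refine ⟨by simpa using ihS, ?_⟩
    intro a b ha1 ha2 hb1 hb2
    simp only [List.foldl_cons]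
    rw [ihV a b ha1 ha2 hb1 hb2]
    rw [innV a b ha1 ha2 hb1 hb2]
    by_cases hmem : ((H : Int) - 1 - b) ∈ ys
    · rw [if_pos hmem, if_pos (List.mem_cons_of_mem _ hmem)]
    · rw [if_neg hmem]
      by_cases heq : b = (H : Int) - y - 1
      · have hyb : (H : Int) - 1 - b = y := by omega
        rw [if_pos ⟨PySem.List.mem_pyRange_one.mpr ⟨ha1, by exact_mod_cast ha2⟩, heq⟩,
            if_pos (List.mem_cons.mpr (Or.inl hyb)), hyb]
      · rw [if_neg (by intro hc; exact heq hc.2), if_neg (by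
          intro hc
          rcases List.mem_cons.mp hc with h | h
          · exact heq (by omega)
          · exact hmem h)]

lemma rotateA_eq_rotB {g : List (List Int)} {H W : Nat} (hg : Shape g H W)
    (hH : 0 < H) (hW : 0 < W) : rotateA g = rotB g := by
  have hA : rotateA g = (PySem.List.pyRange 0 (H : Int) 1).foldl
      (fun r y => (PySem.List.pyRange 0 (W : Int) 1).foldl
        (fun r x => upd r x ((H : Int) - y - 1) (cellVal g y x)) r)
      (List.replicate W (List.replicate H 0)) := by
    unfold rotateA upd
    rw [hg.1, headlen hg hH]
    simp only [Int.toNat_natCast]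
  obtain ⟨hS, hV⟩ := rotA_outer g H W (PySem.List.pyRange 0 (H : Int) 1)
    (List.replicate W (List.replicate H 0)) (shape_replicate _ _ 0)
    (fun y hy => by rw [PySem.List.mem_pyRange_one] at hy; exact hy)
  rw [hA]
  refine grid_ext hS (rotB_shape hg hH) ?_
  intro a b ha1 ha2 hb1 hb2
  rw [hV a b ha1 ha2 hb1 hb2]
  rw [if_pos (PySem.List.mem_pyRange_one.mpr ⟨by omega, by omega⟩)]
  rw [cellVal_rotB hg hH ⟨ha1, ha2⟩ ⟨hb1, hb2⟩]

-- ---------- Part 6: the canonical form names the rotation class ----------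

lemma ltIntList_irrefl (l : List Int) : ltIntList l l = false := by
  induction l with
  | nil => rfl
  | cons a l ih => simp [ltIntList, ih]

lemma ltIntList_eq_of_not {a b : List Int} (h1 : ltIntList a b = false)
    (h2 : ltIntList b a = false) : a = b := by
  induction a generalizing b with
  | nil => cases b with
    | nil => rfl
    | cons x xs => simp [ltIntList] at h1
  | cons x xs ih =>
    cases b with
    | nil => simp [ltIntList] at h2
    | cons y ys =>
      simp only [ltIntList] at h1 h2
      by_cases hxy : x = y
      · subst hxy
        rw [if_pos rfl] at h1 h2
        rw [ih h1 h2]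
      · rw [if_neg hxy, decide_eq_false_iff_not, not_lt] at h1
        rw [if_neg (fun h => hxy h.symm), decide_eq_false_iff_not, not_lt] at h2
        exact absurd (le_antisymm h2 h1) hxy

lemma ltIntList_trans {a b c : List Int} (h1 : ltIntList a b = true)
    (h2 : ltIntList b c = true) : ltIntList a c = true := by
  induction a generalizing b c with
  | nil =>
    cases c with
    | nil =>
      cases b with
      | nil => simp [ltIntList] at h1
      | cons y ys => simp [ltIntList] at h2
    | cons z zs => rfl
  | cons x xs ih =>
    cases b with
    | nil => simp [ltIntList] at h1
    | cons y ys =>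
      cases c with
      | nil => simp [ltIntList] at h2
      | cons z zs =>
        simp only [ltIntList] at h1 h2 ⊢
        by_cases hxy : x = y <;> by_cases hyz : y = z
        · subst hxy; subst hyz
          rw [if_pos rfl] at h1 h2 ⊢
          exact ih h1 h2
        · subst hxy
          rw [if_pos rfl] at h1
          rw [if_neg hyz] at h2
          rw [if_neg hyz]
          exact h2
        · subst hyz
          rw [if_neg hxy] at h1
          rw [if_neg hxy]
          exact h1
        · rw [if_neg hxy] at h1
          rw [if_neg hyz] at h2
          simp only [decide_eq_true_eq] at h1 h2
          by_cases hxz : x = z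
          · subst hxz; omega
          · rw [if_neg hxz]
            simp only [decide_eq_true_eq]
            omega

lemma ltGrid_irrefl (l : List (List Int)) : ltGrid l l = false := by
  induction l with
  | nil => rfl
  | cons a l ih => simp [ltGrid, ih]

lemma ltGrid_eq_of_not {a b : List (List Int)} (h1 : ltGrid a b = false)
    (h2 : ltGrid b a = false) : a = b := by
  induction a generalizing b with
  | nil => cases b with
    | nil => rfl
    | cons x xs => simp [ltGrid] at h1
  | cons x xs ih =>
    cases b with
    | nil => simp [ltGrid] at h2
    | cons y ys =>
      simp only [ltGrid] at h1 h2
      by_cases hxy : x = y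
      · subst hxy
        rw [if_pos rfl] at h1 h2
        rw [ih h1 h2]
      · rw [if_neg hxy] at h1
        rw [if_neg (fun h => hxy h.symm)] at h2
        exact absurd (ltIntList_eq_of_not h1 h2) hxy

lemma ltGrid_trans {a b c : List (List Int)} (h1 : ltGrid a b = true)
    (h2 : ltGrid b c = true) : ltGrid a c = true := by
  induction a generalizing b c with
  | nil =>
    cases c with
    | nil =>
      cases b with
      | nil => simp [ltGrid] at h1
      | cons y ys => simp [ltGrid] at h2
    | cons z zs => rfl
  | cons x xs ih =>
    cases b with
    | nil => simp [ltGrid] at h1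
    | cons y ys =>
      cases c with
      | nil => simp [ltGrid] at h2
      | cons z zs =>
        simp only [ltGrid] at h1 h2 ⊢
        by_cases hxy : x = y <;> by_cases hyz : y = z
        · subst hxy; subst hyz
          rw [if_pos rfl] at h1 h2 ⊢
          exact ih h1 h2
        · subst hxy
          rw [if_pos rfl] at h1
          rw [if_neg hyz] at h2 ⊢
          exact h2
        · subst hyz
          rw [if_neg hxy] at h1 ⊢
          exact h1
        · rw [if_neg hxy] at h1
          rw [if_neg hyz] at h2
          by_cases hxz : x = z
          · subst hxz
            exact absurd (ltIntList_trans h1 h2) (by rw [ltIntList_irrefl]; simp)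
          · rw [if_neg hxz]
            exact ltIntList_trans h1 h2

lemma ltGrid_not_trans {a b c : List (List Int)} (h1 : ltGrid a b = false)
    (h2 : ltGrid b c = false) : ltGrid a c = false := by
  by_contra h
  rw [Bool.not_eq_false] at h
  by_cases hba : ltGrid b a = true
  · exact absurd (ltGrid_trans hba h) (by rw [h2]; simp)
  · rw [Bool.not_eq_true] at hba
    obtain rfl := ltGrid_eq_of_not h1 hba
    rw [h] at h2
    simp at h2

def min2 (m x : List (List Int)) : List (List Int) := if ltGrid x m then x else m

lemma ltGrid_min2_left (m x : List (List Int)) : ltGrid m (min2 m x) = false := by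
  unfold min2
  by_cases h : ltGrid x m = true
  · rw [if_pos h]
    by_contra hc
    rw [Bool.not_eq_false] at hc
    exact absurd (ltGrid_trans hc h) (by rw [ltGrid_irrefl]; simp)
  · rw [if_neg h, ltGrid_irrefl]

lemma ltGrid_min2_right (m x : List (List Int)) : ltGrid x (min2 m x) = false := by
  unfold min2
  by_cases h : ltGrid x m = true
  · rw [if_pos h, ltGrid_irrefl]
  · rw [if_neg h, Bool.not_eq_true] at *
    exact h

lemma min2_cases (m x : List (List Int)) : min2 m x = m ∨ min2 m x = x := by
  unfold min2; split_ifs <;> simp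

lemma minList_spec (l : List (List (List Int))) :
    ∀ m, (l.foldl min2 m ∈ m :: l) ∧ (∀ y ∈ m :: l, ltGrid y (l.foldl min2 m) = false) := by
  induction l with
  | nil => intro m; exact ⟨List.mem_cons_self, by
      intro y hy
      rcases List.mem_cons.mp hy with rfl | h
      · simp [ltGrid_irrefl]
      · simp at h⟩
  | cons x l ih =>
    intro m
    obtain ⟨ihMem, ihMin⟩ := ih (min2 m x)
    constructor
    · simp only [List.foldl_cons, List.mem_cons]
      rcases List.mem_cons.mp ihMem with h | h
      · rcases min2_cases m x with h2 | h2
        · exact Or.inl (h.trans h2)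
        · exact Or.inr (Or.inl (h.trans h2))
      · exact Or.inr (Or.inr h)
    · intro y hy
      simp only [List.foldl_cons]
      have hm2 : ltGrid y (min2 m x) = false ∨ y ∈ l := by
        rcases List.mem_cons.mp hy with rfl | hy'
        · exact Or.inl (ltGrid_min2_left _ _)
        · rcases List.mem_cons.mp hy' with rfl | hy''
          · exact Or.inl (ltGrid_min2_right _ _)
          · exact Or.inr hy''
      rcases hm2 with h | h
      · exact ltGrid_not_trans h (ihMin _ List.mem_cons_self)
      · exact ihMin _ (List.mem_cons_of_mem _ h)

def cands (g : List (List Int)) : List (List (List Int)) :=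
  [g, rotB g, rotB (rotB g), rotB (rotB (rotB g))]

lemma canonB_eq_minList (g : List (List Int)) :
    canonB g = [rotB g, rotB (rotB g), rotB (rotB (rotB g))].foldl min2 g := by
  unfold canonB min2
  rw [show PySem.List.pyRange 0 3 1 = [0, 1, 2] from by decide]
  rfl

lemma canonB_spec (g : List (List Int)) :
    canonB g ∈ cands g ∧ ∀ y ∈ cands g, ltGrid y (canonB g) = false := by
  rw [canonB_eq_minList]
  exact minList_spec _ g

lemma canonB_eq_of_same_cands {g h : List (List Int)}
    (hmem : ∀ x, x ∈ cands g ↔ x ∈ cands h) : canonB g = canonB h := by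
  obtain ⟨m1, b1⟩ := canonB_spec g
  obtain ⟨m2, b2⟩ := canonB_spec h
  exact ltGrid_eq_of_not (b2 _ ((hmem _).mp m1)) (b1 _ ((hmem _).mpr m2))

-- rotation class (as membership in the four candidates)
def RotOf (g h : List (List Int)) : Prop := g ∈ cands h

lemma canonB_rot {g : List (List Int)} {H W : Nat} (hg : Shape g H W) (hH : 0 < H) (hW : 0 < W) :
    canonB (rotB g) = canonB g := by
  have e4 := rotB_four hg hH hW
  apply canonB_eq_of_same_cands
  intro x
  simp only [cands, List.mem_cons, List.not_mem_nil, or_false]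
  constructor
  · intro hx
    rcases hx with h1 | h1 | h1 | h1
    · exact Or.inr (Or.inl h1)
    · exact Or.inr (Or.inr (Or.inl h1))
    · exact Or.inr (Or.inr (Or.inr h1))
    · exact Or.inl (h1.trans e4)
  · intro hx
    rcases hx with h1 | h1 | h1 | h1
    · exact Or.inr (Or.inr (Or.inr (h1.trans e4.symm)))
    · exact Or.inl h1
    · exact Or.inr (Or.inl h1)
    · exact Or.inr (Or.inr (Or.inl h1))

lemma rotOf_symm {g h : List (List Int)} {H W : Nat} (hh : Shape h H W) (hH : 0 < H) (hW : 0 < W)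
    (hr : RotOf g h) : RotOf h g := by
  have e4 := rotB_four hh hH hW
  simp only [RotOf, cands, List.mem_cons, List.not_mem_nil, or_false] at hr ⊢
  rcases hr with h1 | h1 | h1 | h1
  · exact Or.inl h1.symm
  · exact Or.inr (Or.inr (Or.inr
      (((congrArg (fun z => rotB (rotB (rotB z))) h1).trans e4).symm)))
  · exact Or.inr (Or.inr (Or.inl
      (((congrArg (fun z => rotB (rotB z)) h1).trans e4).symm)))
  · exact Or.inr (Or.inl (((congrArg (fun z => rotB z) h1).trans e4).symm))

lemma rotOf_trans {g h k : List (List Int)} {H W : Nat} (hk : Shape k H W) (hH : 0 < H) (hW : 0 < W)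
    (h1 : RotOf g h) (h2 : RotOf h k) : RotOf g k := by
  have e4 := rotB_four hk hH hW
  have e5 : rotB (rotB (rotB (rotB (rotB k)))) = rotB k := congrArg rotB e4
  have e6 : rotB (rotB (rotB (rotB (rotB (rotB k))))) = rotB (rotB k) :=
    congrArg (fun z => rotB (rotB z)) e4
  simp only [RotOf, cands, List.mem_cons, List.not_mem_nil, or_false] at h1 h2 ⊢
  rcases h2 with h2 | h2 | h2 | h2 <;> rcases h1 with h1 | h1 | h1 | h1
  · exact Or.inl (h1.trans h2)
  · exact Or.inr (Or.inl (h1.trans (congrArg rotB h2)))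
  · exact Or.inr (Or.inr (Or.inl (h1.trans (congrArg (fun z => rotB (rotB z)) h2))))
  · exact Or.inr (Or.inr (Or.inr (h1.trans (congrArg (fun z => rotB (rotB (rotB z))) h2))))
  · exact Or.inr (Or.inl (h1.trans h2))
  · exact Or.inr (Or.inr (Or.inl (h1.trans (congrArg rotB h2))))
  · exact Or.inr (Or.inr (Or.inr (h1.trans (congrArg (fun z => rotB (rotB z)) h2))))
  · exact Or.inl ((h1.trans (congrArg (fun z => rotB (rotB (rotB z))) h2)).trans e4)
  · exact Or.inr (Or.inr (Or.inl (h1.trans h2)))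
  · exact Or.inr (Or.inr (Or.inr (h1.trans (congrArg rotB h2))))
  · exact Or.inl ((h1.trans (congrArg (fun z => rotB (rotB z)) h2)).trans e4)
  · exact Or.inr (Or.inl ((h1.trans (congrArg (fun z => rotB (rotB (rotB z))) h2)).trans e5))
  · exact Or.inr (Or.inr (Or.inr (h1.trans h2)))
  · exact Or.inl ((h1.trans (congrArg rotB h2)).trans e4)
  · exact Or.inr (Or.inl ((h1.trans (congrArg (fun z => rotB (rotB z)) h2)).trans e5))
  · exact Or.inr (Or.inr (Or.inl ((h1.trans
      (congrArg (fun z => rotB (rotB (rotB z))) h2)).trans e6)))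

lemma canonB_of_rotOf {g h : List (List Int)} {H W : Nat} (hh : Shape h H W)
    (hH : 0 < H) (hW : 0 < W) (hr : RotOf g h) : canonB g = canonB h := by
  have s1 : Shape (rotB h) W H := rotB_shape hh hH
  have s2 : Shape (rotB (rotB h)) H W := rotB_shape s1 hW
  have c1 : canonB (rotB h) = canonB h := canonB_rot hh hH hW
  have c2 : canonB (rotB (rotB h)) = canonB h := by rw [canonB_rot s1 hW hH, c1]
  have c3 : canonB (rotB (rotB (rotB h))) = canonB h := by rw [canonB_rot s2 hH hW, c2]
  simp only [RotOf, cands, List.mem_cons, List.not_mem_nil, or_false] at hr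
  rcases hr with h1 | h1 | h1 | h1
  · rw [h1]
  · rw [h1]; exact c1
  · rw [h1]; exact c2
  · rw [h1]; exact c3

lemma rotOf_of_canonB_eq {g h : List (List Int)} {Hg Wg Hh Wh : Nat}
    (hg : Shape g Hg Wg) (hHg : 0 < Hg) (hWg : 0 < Wg)
    (hh : Shape h Hh Wh) (hHh : 0 < Hh) (hWh : 0 < Wh)
    (hc : canonB g = canonB h) : RotOf g h := by
  have h1 : RotOf g (canonB g) := rotOf_symm hg hHg hWg (canonB_spec g).1
  rw [hc] at h1
  exact rotOf_trans hh hHh hWh h1 (canonB_spec h).1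

def WFG (g : List (List Int)) : Prop := ∃ H W : Nat, 0 < H ∧ 0 < W ∧ Shape g H W

-- the matching-loop body of is_fit, named for the proofs (isFit is definitionally this fold)
def fitStep (g : List (List Int)) (N M : Int) (st : List (List Int) × Bool) (i : Int) :
    List (List Int) × Bool :=
  if st.2 then st
  else
    let tgt := if 0 < i then rotateA st.1 else st.1
    if N ≠ (tgt.length : Int) then (tgt, false)
    else if M ≠ ((PySem.List.pyGetD tgt 0 []).length : Int) then (tgt, false)
    else (tgt, (PySem.List.pyRange 0 N 1).all (fun y =>
      (PySem.List.pyRange 0 M 1).all (fun x => cellVal g y x == cellVal tgt y x)))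

lemma isFit_eq (p e : Int × List (List Int)) :
    isFit p e = if p.1 ≠ e.1 then false else
      ((PySem.List.pyRange 0 4 1).foldl
        (fitStep p.2 ((p.2.length : Nat) : Int) (((PySem.List.pyGetD p.2 0 []).length : Nat) : Int))
        (e.2, false)).2 := rfl

lemma shape_dims_eq {g : List (List Int)} {H1 W1 H2 W2 : Nat} (h1 : Shape g H1 W1)
    (h2 : Shape g H2 W2) (hH : 0 < H1) : H1 = H2 ∧ W1 = W2 := by
  have hl : H1 = H2 := by rw [← h1.1, h2.1]
  refine ⟨hl, ?_⟩
  have := headlen h1 hH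
  have := headlen h2 (by omega)
  omega

lemma check_val {g t : List (List Int)} {Hg Wg Ht Wt : Nat}
    (hg : Shape g Hg Wg) (ht : Shape t Ht Wt)
    (hHg : 0 < Hg) (hWg : 0 < Wg) (hHt : 0 < Ht) (hWt : 0 < Wt) :
    (if ((g.length : Nat) : Int) ≠ ((t.length : Nat) : Int) then false
     else if (((PySem.List.pyGetD g 0 []).length : Nat) : Int) ≠ (((PySem.List.pyGetD t 0 []).length : Nat) : Int) then false
     else (PySem.List.pyRange 0 ((g.length : Nat) : Int) 1).all (fun y =>
       (PySem.List.pyRange 0 (((PySem.List.pyGetD g 0 []).length : Nat) : Int) 1).all (fun x =>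
         cellVal g y x == cellVal t y x))) = decide (g = t) := by
  by_cases hL : g.length = t.length
  · rw [if_neg (by simp [hL])]
    have hHeq : Ht = Hg := by rw [← ht.1, ← hL, hg.1]
    by_cases hW : Wg = Wt
    · rw [if_neg (by rw [headlen hg hHg, headlen ht hHt]; simp [hW])]
      by_cases hgt : g = t
      · subst hgt
        rw [decide_eq_true rfl]
        simp only [List.all_eq_true]
        intro y _ x _
        exact beq_self_eq_true _
      · rw [decide_eq_false hgt]
        by_contra hall
        rw [Bool.not_eq_false, List.all_eq_true] at hall
        apply hgt
        refine grid_ext hg (H := Hg) (W := Wg) (by rw [hW]; rw [← hHeq]; exact ht) ?_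
        intro y x hy1 hy2 hx1 hx2
        have h1 := hall y (PySem.List.mem_pyRange_one.mpr ⟨hy1, by rw [hg.1]; exact_mod_cast hy2⟩)
        rw [List.all_eq_true] at h1
        have h2 := h1 x (PySem.List.mem_pyRange_one.mpr ⟨hx1, by rw [headlen hg hHg]; exact_mod_cast hx2⟩)
        exact eq_of_beq h2
    · rw [if_pos (by rw [headlen hg hHg, headlen ht hHt]; simp [hW])]
      have : g ≠ t := by
        intro h
        subst h
        exact hW (shape_dims_eq hg ht hHg).2
      simp [this]
  · rw [if_pos (by simp [hL])]
    have : g ≠ t := fun h => hL (by rw [h])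
    simp [this]

lemma fitStep_true (g : List (List Int)) (N M : Int) (t : List (List Int)) (i : Int) :
    fitStep g N M (t, true) i = (t, true) := by simp [fitStep]

lemma fitStep_zero {g t : List (List Int)} {Hg Wg Ht Wt : Nat}
    (hg : Shape g Hg Wg) (ht : Shape t Ht Wt)
    (hHg : 0 < Hg) (hWg : 0 < Wg) (hHt : 0 < Ht) (hWt : 0 < Wt) :
    fitStep g ((g.length : Nat) : Int) (((PySem.List.pyGetD g 0 []).length : Nat) : Int) (t, false) 0
      = (t, decide (g = t)) := by
  have hc := check_val hg ht hHg hWg hHt hWt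
  simp only [fitStep]
  norm_num
  by_cases hL : g.length = t.length
  · rw [if_pos hL]
    by_cases hW2 : (PySem.List.pyGetD g 0 []).length = (PySem.List.pyGetD t 0 []).length
    · rw [if_pos hW2]
      rw [if_neg (by simp [hL]), if_neg (by simp [hW2])] at hc
      rw [hc]
    · rw [if_neg hW2]
      have hne : g ≠ t := fun h => hW2 (by rw [h])
      simp [hne]
  · rw [if_neg hL]
    have hne : g ≠ t := fun h => hL (by rw [h])
    simp [hne]

lemma fitStep_pos {g t : List (List Int)} {Hg Wg Ht Wt : Nat}
    (hg : Shape g Hg Wg) (ht : Shape t Ht Wt)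
    (hHg : 0 < Hg) (hWg : 0 < Wg) (hHt : 0 < Ht) (hWt : 0 < Wt)
    {i : Int} (hi : 0 < i) :
    fitStep g ((g.length : Nat) : Int) (((PySem.List.pyGetD g 0 []).length : Nat) : Int) (t, false) i
      = (rotB t, decide (g = rotB t)) := by
  have hc := check_val hg (rotB_shape ht hHt) hHg hWg hWt hHt
  simp only [fitStep]
  norm_num [hi]
  rw [rotateA_eq_rotB ht hHt hWt]
  by_cases hL : g.length = (rotB t).length
  · rw [if_pos hL]
    by_cases hW2 : (PySem.List.pyGetD g 0 []).length = (PySem.List.pyGetD (rotB t) 0 []).length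
    · rw [if_pos hW2]
      rw [if_neg (by simp [hL]), if_neg (by simp [hW2])] at hc
      rw [hc]
    · rw [if_neg hW2]
      have hne : g ≠ rotB t := fun h => hW2 (by rw [h])
      simp [hne]
  · rw [if_neg hL]
    have hne : g ≠ rotB t := fun h => hL (by rw [h])
    simp [hne]

lemma isFit_char {p e : Int × List (List Int)} {Hp Wp He We : Nat}
    (hp : Shape p.2 Hp Wp) (hHp : 0 < Hp) (hWp : 0 < Wp)
    (he : Shape e.2 He We) (hHe : 0 < He) (hWe : 0 < We) :
    isFit p e = true ↔ (p.1 = e.1 ∧ RotOf p.2 e.2) := by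
  have s1 : Shape (rotB e.2) We He := rotB_shape he hHe
  have s2 : Shape (rotB (rotB e.2)) He We := rotB_shape s1 hWe
  have s3 : Shape (rotB (rotB (rotB e.2))) We He := rotB_shape s2 hHe
  rw [isFit_eq]
  by_cases hpe : p.1 = e.1
  · rw [if_neg (by simp [hpe])]
    rw [show PySem.List.pyRange 0 4 1 = [0, 1, 2, 3] from by decide]
    simp only [List.foldl_cons, List.foldl_nil]
    rw [fitStep_zero hp he hHp hWp hHe hWe]
    by_cases h0 : p.2 = e.2
    · rw [decide_eq_true h0, fitStep_true, fitStep_true, fitStep_true]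
      constructor
      · intro _; exact ⟨hpe, by simp [RotOf, cands, h0]⟩
      · intro _; rfl
    · rw [decide_eq_false h0, fitStep_pos hp he hHp hWp hHe hWe (by norm_num)]
      by_cases h1 : p.2 = rotB e.2
      · rw [decide_eq_true h1, fitStep_true, fitStep_true]
        constructor
        · intro _; exact ⟨hpe, by simp [RotOf, cands, h1]⟩
        · intro _; rfl
      · rw [decide_eq_false h1, fitStep_pos hp s1 hHp hWp hWe hHe (by norm_num)]
        by_cases h2 : p.2 = rotB (rotB e.2)
        · rw [decide_eq_true h2, fitStep_true]
          constructor
          · intro _; exact ⟨hpe, by simp [RotOf, cands, h2]⟩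
          · intro _; rfl
        · rw [decide_eq_false h2, fitStep_pos hp s2 hHp hWp hHe hWe (by norm_num)]
          by_cases h3 : p.2 = rotB (rotB (rotB e.2))
          · rw [decide_eq_true h3]
            constructor
            · intro _; exact ⟨hpe, by simp [RotOf, cands, h3]⟩
            · intro _; rfl
          · rw [decide_eq_false h3]
            constructor
            · intro hh; exact absurd hh (by simp)
            · rintro ⟨_, hrot⟩
              exfalso
              simp [RotOf, cands, h0, h1, h2, h3] at hrot
  · rw [if_pos hpe]
    simp [hpe]

-- the single characterization the matching phase needs
lemma isFit_iff_key {p e : Int × List (List Int)} (hp : WFG p.2) (he : WFG e.2) :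
    isFit p e = true ↔ (p.1 = e.1 ∧ canonB p.2 = canonB e.2) := by
  obtain ⟨Hp, Wp, hHp, hWp, hp⟩ := hp
  obtain ⟨He, We, hHe, hWe, he⟩ := he
  rw [isFit_char hp hHp hWp he hHe hWe]
  constructor
  · rintro ⟨h1, h2⟩
    exact ⟨h1, canonB_of_rotOf he hHe hWe h2⟩
  · rintro ⟨h1, h2⟩
    exact ⟨h1, rotOf_of_canonB_eq hp hHp hWp he hHe hWe h2⟩

-- ---------- Part 7: the greedy first-fit loop counts min(pieces, spaces) per key ----------

def keyF (q : Int × List (List Int)) : Int × List (List Int) := (q.1, canonB q.2)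

def greedyK : List (Int × List (List Int)) → List (Int × List (List Int)) → Int
  | [], _ => 0
  | k :: ks, ls => if k ∈ ls then k.1 + greedyK ks (ls.erase k) else greedyK ks ls

lemma isFit_decide {p e : Int × List (List Int)} (hp : WFG p.2) (he : WFG e.2) :
    isFit p e = decide (keyF p = keyF e) := by
  have h := isFit_iff_key hp he
  have hk : keyF p = keyF e ↔ (p.1 = e.1 ∧ canonB p.2 = canonB e.2) := by
    unfold keyF
    rw [Prod.ext_iff]
  by_cases hd : keyF p = keyF e
  · rw [decide_eq_true hd]
    exact h.mpr (hk.mp hd)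
  · rw [decide_eq_false hd]
    by_contra hc
    rw [Bool.not_eq_false] at hc
    exact hd (hk.mpr (h.mp hc))

lemma scan_step (p : Int × List (List Int)) (T : List (Int × List (List Int)))
    (hfit : ∀ e ∈ T, isFit p e = decide (keyF p = keyF e)) :
    (T.findIdx? (isFit p) = none → keyF p ∉ T.map keyF) ∧
    (∀ idx, T.findIdx? (isFit p) = some idx →
      idx < T.length ∧ keyF (T.getD idx (0, [])) = keyF p ∧
      (T.eraseIdx idx).map keyF = (T.map keyF).erase (keyF p)) := by
  induction T with
  | nil => exact ⟨fun _ => by simp, fun idx h => by simp [List.findIdx?, List.findIdx?.go] at h⟩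
  | cons e T ih =>
    have hfe := hfit e List.mem_cons_self
    obtain ⟨ihn, ihs⟩ := ih (fun x hx => hfit x (List.mem_cons_of_mem _ hx))
    by_cases hk : keyF p = keyF e
    · constructor
      · intro hn
        rw [List.findIdx?_cons, hfe, if_pos (decide_eq_true hk)] at hn
        simp at hn
      · intro idx hs
        rw [List.findIdx?_cons, hfe, if_pos (decide_eq_true hk)] at hs
        obtain rfl : (0 : Nat) = idx := by simpa using hs
        refine ⟨by simp, by simpa using hk.symm, ?_⟩
        rw [List.eraseIdx_cons_zero, List.map_cons, List.erase_cons,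
          if_pos (by simp [hk])]
    · constructor
      · intro hn
        rw [List.findIdx?_cons, hfe, if_neg (by simp [hk])] at hn
        rw [Option.map_eq_none_iff] at hn
        intro hmem
        rcases List.mem_cons.mp hmem with h | h
        · exact hk h
        · exact ihn hn h
      · intro idx hs
        rw [List.findIdx?_cons, hfe, if_neg (by simp [hk])] at hs
        obtain ⟨i, hi, rfl⟩ := Option.map_eq_some_iff.mp hs
        obtain ⟨hlen, hkey, herase⟩ := ihs i hi
        refine ⟨by simp; omega, by simpa using hkey, ?_⟩
        rw [List.eraseIdx_cons_succ, List.map_cons, List.map_cons, List.erase_cons,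
          if_neg (by simp; exact fun hc => hk hc.symm), herase]

lemma removal_eq (T : List (Int × List (List Int))) (idx : Nat) (h : idx < T.length) :
    (if ((idx : Nat) : Int) + 1 ≥ ((T.length : Nat) : Int)
      then PySem.List.slice T none (some ((idx : Nat) : Int))
      else PySem.List.slice T none (some ((idx : Nat) : Int))
        ++ PySem.List.slice T (some (((idx : Nat) : Int) + 1)) none) = T.eraseIdx idx := by
  rw [List.eraseIdx_eq_take_drop_succ, PySem.List.slice_to_natCast]
  by_cases hge : ((idx : Nat) : Int) + 1 ≥ ((T.length : Nat) : Int)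
  · rw [if_pos hge]
    have : T.drop (idx + 1) = [] := List.drop_eq_nil_iff.mpr (by omega)
    rw [this, List.append_nil]
  · rw [if_neg hge]
    congr 1
    rw [show ((idx : Nat) : Int) + 1 = (((idx + 1 : Nat) : Nat) : Int) from by push_cast; ring]
    exact PySem.List.slice_from_natCast _ _

lemma loopA (P : List (Int × List (List Int))) :
    ∀ (T : List (Int × List (List Int))) (ans : Int),
    (∀ p ∈ P, WFG p.2) → (∀ e ∈ T, WFG e.2) →
    (P.foldl (fun (st : Int × List (Int × List (List Int))) p =>
      match (st.2).findIdx? (isFit p) with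
      | none => st
      | some idx =>
        let e := (st.2).getD idx (0, [])
        let ts := if (idx : Int) + 1 ≥ (st.2.length : Int)
          then PySem.List.slice st.2 none (some (idx : Int))
          else PySem.List.slice st.2 none (some (idx : Int))
            ++ PySem.List.slice st.2 (some ((idx : Int) + 1)) none
        (st.1 + e.1, ts)) (ans, T)).1
      = ans + greedyK (P.map keyF) (T.map keyF) := by
  induction P with
  | nil => intro T ans _ _; simp [greedyK]
  | cons p P ih =>
    intro T ans hP hT
    have hfit : ∀ e ∈ T, isFit p e = decide (keyF p = keyF e) :=
      fun e he => isFit_decide (hP p List.mem_cons_self) (hT e he)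
    obtain ⟨hnone, hsome⟩ := scan_step p T hfit
    simp only [List.foldl_cons]
    cases hidx : T.findIdx? (isFit p) with
    | none =>
      simp only [hidx]
      rw [ih T ans (fun q hq => hP q (List.mem_cons_of_mem _ hq)) hT]
      rw [List.map_cons, greedyK, if_neg (hnone hidx)]
    | some idx =>
      obtain ⟨hlen, hkey, herase⟩ := hsome idx hidx
      simp only [hidx]
      rw [removal_eq T idx hlen]
      rw [ih (T.eraseIdx idx) (ans + (T.getD idx (0, [])).1)
        (fun q hq => hP q (List.mem_cons_of_mem _ hq))
        (fun q hq => hT q (List.eraseIdx_subset hq))]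
      rw [herase, List.map_cons, greedyK, if_pos ?hmem]
      case hmem =>
        have hmem : T.getD idx (0, []) ∈ T := by
          rw [List.getD_eq_getElem _ _ hlen]
          exact List.getElem_mem _
        rw [← hkey]
        exact List.mem_map_of_mem hmem
      have he1 : (T.getD idx (0, [])).1 = (keyF p).1 := by
        rw [← hkey]; rfl
      rw [he1]
      ring

lemma greedyK_count (ks : List (Int × List (List Int))) :
    ∀ ls, greedyK ks ls =
      ∑ k ∈ ks.toFinset, min ((ks.count k : Int)) ((ls.count k : Int)) * k.1 := by
  induction ks with
  | nil => intro ls; simp [greedyK]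
  | cons k ks ih =>
    intro ls
    rw [List.toFinset_cons]
    have hself : ((k == k) : Bool) = true := by simp
    by_cases hmem : k ∈ ls
    · have hcnt : 1 ≤ ls.count k := List.count_pos_iff.mpr hmem
      rw [greedyK, if_pos hmem, ih (ls.erase k)]
      rw [← Finset.add_sum_erase _ _ (Finset.mem_insert_self k ks.toFinset),
          Finset.erase_insert_eq_erase]
      have hterm : min (((k :: ks).count k : Int)) ((ls.count k : Int)) * k.1
          = k.1 + min ((ks.count k : Int)) (((ls.erase k).count k : Int)) * k.1 := by
        rw [List.count_cons, List.count_erase, if_pos hself]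
        have h1 : min (((ks.count k + 1 : Nat)) : Int) (((ls.count k : Nat)) : Int)
            = 1 + min (((ks.count k : Nat)) : Int) (((ls.count k - 1 : Nat)) : Int) := by
          push_cast
          omega
        rw [h1]
        ring
      have hcongr : ∀ j ∈ ks.toFinset.erase k,
          min (((k :: ks).count j : Int)) ((ls.count j : Int)) * j.1
            = min ((ks.count j : Int)) (((ls.erase k).count j : Int)) * j.1 := by
        intro j hj
        have hjk : j ≠ k := (Finset.mem_erase.mp hj).1
        have hkj : ¬ (((k == j) : Bool) = true) := by
          simp only [beq_iff_eq]; exact fun h => hjk h.symm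
        rw [List.count_cons, List.count_erase, if_neg hkj]
        norm_num
      by_cases hks : k ∈ ks.toFinset
      · rw [← Finset.add_sum_erase _
          (fun j => min ((ks.count j : Int)) (((ls.erase k).count j : Int)) * j.1) hks]
        rw [hterm, Finset.sum_congr rfl hcongr]
        ring
      · have hk0 : ks.count k = 0 := by
          rw [List.count_eq_zero]
          intro hc; exact hks (List.mem_toFinset.mpr hc)
        have her : ks.toFinset.erase k = ks.toFinset := Finset.erase_eq_of_notMem hks
        have hterm2 : min (((k :: ks).count k : Int)) ((ls.count k : Int)) * k.1 = k.1 := by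
          rw [List.count_cons, hk0, if_pos hself]
          have h1 : min (((0 + 1 : Nat)) : Int) (((ls.count k : Nat)) : Int) = 1 := by
            push_cast
            omega
          rw [h1]; ring
        rw [hterm2, her, Finset.sum_congr rfl (fun j hj => hcongr j
          (Finset.mem_erase.mpr ⟨fun h => hks (h ▸ hj), hj⟩))]
    · have hcnt : ls.count k = 0 := by
        rw [List.count_eq_zero]; exact hmem
      rw [greedyK, if_neg hmem, ih ls]
      have hcongr : ∀ j ∈ ks.toFinset.erase k,
          min (((k :: ks).count j : Int)) ((ls.count j : Int)) * j.1
            = min ((ks.count j : Int)) ((ls.count j : Int)) * j.1 := by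
        intro j hj
        have hjk : j ≠ k := (Finset.mem_erase.mp hj).1
        have hkj : ¬ (((k == j) : Bool) = true) := by
          simp only [beq_iff_eq]; exact fun h => hjk h.symm
        rw [List.count_cons, if_neg hkj]
        norm_num
      have hzero : min (((k :: ks).count k : Int)) ((ls.count k : Int)) * k.1 = 0 := by
        rw [hcnt]
        have h0 : min ((((k :: ks).count k : Nat)) : Int) (((0 : Nat)) : Int) = 0 := by
          push_cast
          omega
        rw [h0, zero_mul]
      by_cases hks : k ∈ ks.toFinset
      · rw [← Finset.add_sum_erase _ _ (Finset.mem_insert_self k ks.toFinset),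
            Finset.erase_insert_eq_erase, hzero, zero_add,
            ← Finset.add_sum_erase _
              (fun j => min ((ks.count j : Int)) ((ls.count j : Int)) * j.1) hks]
        have hzero2 : min ((ks.count k : Int)) ((ls.count k : Int)) * k.1 = 0 := by
          rw [hcnt]
          have h0 : min (((ks.count k : Nat)) : Int) (((0 : Nat)) : Int) = 0 := by
            push_cast
            omega
          rw [h0, zero_mul]
        rw [hzero2, zero_add, Finset.sum_congr rfl hcongr]
      · rw [Finset.sum_insert hks, hzero, zero_add,
          Finset.sum_congr rfl (fun j hj => hcongr j
            (Finset.mem_erase.mpr ⟨fun h => hks (h ▸ hj), hj⟩))]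

-- ---------- Part 8: assembling both sides ----------

lemma altSum (Ks Ls : List (Int × List (List Int))) :
    ((PySem.Dict.counter Ks).items.map
      (fun kv => min kv.2 ((PySem.Dict.counter Ls).getD kv.1 0) * kv.1.1)).sum
      = ∑ k ∈ Ks.toFinset, min ((Ks.count k : Int)) ((Ls.count k : Int)) * k.1 := by
  rw [PySem.Dict.items_counter, List.map_map]
  have hc : ∀ k ∈ PySem.Set.ofList Ks,
      ((fun kv => min kv.2 ((PySem.Dict.counter Ls).getD kv.1 0) * kv.1.1) ∘
        (fun k => (k, ((Ks.count k : Nat) : Int)))) k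
      = (fun k => min ((Ks.count k : Int)) ((Ls.count k : Int)) * k.1) k := by
    intro k _
    simp only [Function.comp]
    rw [PySem.Dict.getD_counter]
  rw [List.map_congr_left hc]
  rw [← List.sum_toFinset _ (PySem.Set.nodup_ofList Ks)]
  have hset : (PySem.Set.ofList Ks).toFinset = Ks.toFinset := by
    apply Finset.ext
    intro a
    simp only [List.mem_toFinset, PySem.Set.mem_ofList]
  rw [hset]

lemma WFG_toSquares {c : List (Int × Int)} (h0 : ((0:Int),(0:Int)) ∈ c) :
    WFG (toSquares c) := by
  have hminY : aMinY c ≤ 0 := aMinY_le c _ h0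
  have hminX : aMinX c ≤ 0 := aMinX_le c _ h0
  have hmaxY : 0 ≤ aMaxY c := le_aMaxY c _ h0
  have hmaxX : 0 ≤ aMaxX c := le_aMaxX c _ h0
  exact ⟨_, _, by omega, by omega, (toSquares_shape h0).1⟩

lemma keys_eq (g : List (List Int)) (want : Int) :
    keyList g want = (scanComp g (fun v => v == want)).map
      (fun c => ((c.length : Int), canonB (toSquares c))) := by
  unfold keyList
  rw [bComponents_eq]
  refine List.map_congr_left ?_
  intro c hc
  rw [toSquares_eq_gridB (zero_mem_scanComp g _ c hc)]

lemma createSquares_keys (g : List (List Int)) (want : Int) (b : Bool)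
    (hb : (if b then (1 : Int) else 0) = want) :
    (createSquares g b).map keyF = keyList g want := by
  subst hb
  rw [keys_eq]
  unfold createSquares keyF
  rw [List.map_map]
  rfl

lemma createSquares_WFG (g : List (List Int)) (b : Bool) :
    ∀ p ∈ createSquares g b, WFG p.2 := by
  intro p hp
  obtain ⟨c, hc, rfl⟩ := List.mem_map.mp hp
  exact WFG_toSquares (zero_mem_scanComp g _ c hc)

-- ===== VERDICT (by name: the statement is the Claim_ definition above) =====
theorem solution_spec : Claim_equal_solution := by
  intro board table _ _
  unfold Spec_solution
  have hA : solution board table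
      = 0 + greedyK ((createSquares table true).map keyF) ((createSquares board false).map keyF) := by
    unfold solution
    exact loopA _ _ 0 (createSquares_WFG table true) (createSquares_WFG board false)
  rw [hA, zero_add,
    createSquares_keys table 1 true rfl, createSquares_keys board 0 false rfl,
    greedyK_count]
  show _ = solution_alt board table
  unfold solution_alt
  rw [altSum]
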